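/- GENERATED by mk_final_copies.py from the proof of the farm's unit `start_decoder.R6` (farm:start_decoder.R6.2: Lemmas.lean) as the
   re-elaboration sweep compiled it — do not edit. -/
import Asan.CheckWalk
import Vorbis.Spec.Units.start_decoder_R6

namespace Vorbis.Spec.start_decoder_R6
open X86 X86.User Asan Vorbis Vorbis.Spec Vorbis.Spec.StartDecoder

/-- The live objects inside the function contain those of the callers (the own protected frame is pushed in front). -/
theorem frames_sub (g : Ghost) (others : List Obj) (o : Obj) (ho : o ∈ stackObjs g.frames ++ others) :
    o ∈ stackObjs g.frames' ++ others := by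
  unfold Ghost.frames'
  rw [stackObjs_cons]
  rcases List.mem_append.mp ho with h1 | h2
  · exact List.mem_append_left _ (List.mem_append_right _ h1)
  · exact List.mem_append_right _ h2

/-- **Where `*f` is**, as one arithmetic fact for the walker's side conditions: inside the data space, above the text, and off
start_decoder's own stack (it is an object of a CALLER's frame — at or above `RA + 8` — or off the stack region). -/
theorem obj_where {u₀ : State} {g : Ghost} {pc : Word} {A : Arena × List Obj} {v : State}
    (hf : Frame u₀ g pc A v) (hh : g.Hand A) :
    0x119d40 ≤ g.f ∧ g.f + 1808 ≤ 0xC00000 ∧ (g.RA + 8 ≤ g.f ∨ g.f + 1808 ≤ 0x700000 ∨ 0x800000 ≤ g.f) := by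
  have hl : LiveIn A.2 g.frames' g.f Off.sizeof.stb_vorbis := hh.obj.mono (frames_sub g A.2)
  have hw := hl.where_ hf.shadow hf.offText (by simp only [voff]; omega)
  simp only [voff] at hw
  refine ⟨hw.1, hw.2.1, ?_⟩
  obtain ⟨o, ho, k1, k2⟩ := hh.obj
  simp only [voff] at k2
  rcases List.mem_append.mp ho with hs | hoth
  · unfold stackObjs at hs
    obtain ⟨bF, hbF, hin⟩ := List.mem_flatMap.mp hs
    have hbF' : bF ∈ g.frames' := List.mem_cons_of_mem _ hbF
    obtain ⟨a1, a2, _, _, _⟩ := hf.shadow.stack.active bF hbF'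
    have hg := FrameLayout.objsAt_gran a1 a2 hin
    have hc := hf.callers bF hbF
    have hra := hf.ra
    have e1 : o.gLo = o.base / 8 := rfl
    left
    omega
  · have := hf.shadow.off o hoth
    unfold OffStack at this
    omega

/-- `movzx eax, byte [m]` of a byte value: the zero-extended register holds the number. -/
theorem zx8 (n : Nat) (h : n < 256) :
    Word.ofBV (BitVec.setWidth 64 (BitVec.zeroExtend 32 (BitVec.ofNat 8 n))) = addr n := by
  apply UInt64.toNat_inj.mp
  rw [toNat_addr n (by omega)]
  unfold Word.ofBV
  simp only [UInt64.toNat_ofBitVec, BitVec.toNat_setWidth, BitVec.zeroExtend, BitVec.toNat_ofNat]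
  omega


set_option maxRecDepth 4000
set_option maxHeartbeats 4000000

/-- **Segment R6 from its entry 0x115cf9 to the return of `setup_malloc` at 0x115d40** (C line 4076, 16 of the 42
instructions): the three check sites 0x115d03 (load8 `f->codebooks`, OB1), 0x115d13 (load1 `r->classbook`, R2 + `i < residue_count`),
0x115d2b (load4 `cbk->entries`, CB0 + R7) and the allocator's precondition `ArenaPre` at 0x115d3b are discharged from `BodyR6`.
`hcont` is the REST of the unit (`from_malloc_return` proves it): from the state `sr` after the return, with everything the walker
knows about it in the walker's own forms, to one of the two exit assertions. One lemma per returned callee state (the size rule). -/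
theorem to_malloc_return (Lay : Layout) (hLay : Lay.hi = 0x1000000) (μ : Microarch) (hμ : UserX.MicroOK μ) (u₀ : State)
    (hcode : HasCodeNat Lay u₀ Vorbis.L.start_decoder.entry Vorbis.Code.code_start_decoder.nat Vorbis.L.start_decoder.size)
    (hload8 : Asan.SmallCheck Lay μ Vorbis.WayInv (Vorbis.CodeOK u₀) [.rax, .rcx, .rdx] 8 Vorbis.L.__asan_load8_noabort.entry)
    (hload1 : Asan.SmallCheck Lay μ Vorbis.WayInv (Vorbis.CodeOK u₀) [.rax, .rdx] 1 Vorbis.L.__asan_load1_noabort.entry)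
    (hload4 : Asan.SmallCheck Lay μ Vorbis.WayInv (Vorbis.CodeOK u₀) [.rax, .rcx, .rdx] 4 Vorbis.L.__asan_load4_noabort.entry)
    (hsm : ∀ (others : List Obj) (frames : List (Nat × FrameLayout)) (A : Arena),
      Calls Lay μ Vorbis.WayInv (Vorbis.conv u₀) Vorbis.L.setup_malloc.entry (Vorbis.Spec.setup_malloc.spec others frames A))
    (g : Ghost) (i : Nat) (v : State) (A6 A6c Ai : Arena) (A : Arena × List Obj) (hb : BodyR6 u₀ g i A6 A6c Ai A v)
    (hcont : ∀ (e : State) (r cbs cb E32 : Nat) (sb sr : State),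
      g.e = e → resAt g v.mem i = r → stb_vorbis.codebooks v.mem g.f = cbs → Residue.classbook v.mem r = cb →
      v.mem.readLE (UInt64.ofNat cbs +
        Word.ofBV (BitVec.setWidth 64 (BitVec.zeroExtend 32 (BitVec.ofNat 8 cb))) * 2120 + 4) 4 = E32 →
      sb.reg .rsi = Word.ofBV (BitVec.ofNat 32 E32 <<< 3) →
      sb.reg .rsp = e.reg .rsp - 1488 →
      sb.reg .rdi = addr g.f →
      sb.mem = v.mem.writeLE (e.reg .rsp - 1488) 8 1137984 →
      sr.rip = 1137984 →
      sr.reg .rsp = e.reg .rsp - 1480 →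
      RegsKept [.rsi, .r12, .rsp, .rdi, .rbp, .rax, .rcx, .rdx, .r8, .r9, .r10, .r11, .r16, .r17, .r18, .r19, .r20, .r21,
        .r22, .r23, .r24, .r25, .r26, .r27, .r28, .r29, .r30, .r31] v sr →
      sr.reg .r12 = UInt64.ofNat cbs + Word.ofBV (BitVec.setWidth 64 (BitVec.zeroExtend 32 (BitVec.ofNat 8 cb))) * 2120 →
      sr.reg .rbp = addr g.f →
      Mem.SameExcept ((setup_malloc.spec A.2 g.frames' A.1).footprint sb) sb.mem sr.mem →
      (conv u₀).code.In sr.mem →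
      (conv u₀).inv sr →
      (setup_malloc.spec A.2 g.frames' A.1).post sb sr →
      ReachVia Lay μ WayInv sr (fun w => AtR7 u₀ g i w ∨ AtERR u₀ g w)) :
    ReachVia Lay μ WayInv v (fun w => AtR7 u₀ g i w ∨ AtERR u₀ g w) := by
  obtain ⟨hloop, hr13, hr14, hrbx, hcur⟩ := hb
  obtain ⟨hframe, hhand, hmid, hile, hres, hzero⟩ := hloop
  -- 1. the ENTRY state's facts
  obtain ⟨e, hge⟩ : ∃ e, g.e = e := ⟨_, rfl⟩
  have he : AtEntry (conv u₀) Vorbis.L.start_decoder.entry depth g.ret e := by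
    rw [← hge]
    exact hframe.entry
  v_entry he
  simp only [depth] at he_room he_stack
  have hRA : g.RA = (e.reg .rsp).toNat := by
    unfold Ghost.RA
    rw [hge]
  have hR : g.R = (e.reg .rsp).toNat - 1480 := by
    unfold Ghost.R steady
    rw [hRA]
  -- 2. the PRESENT state's facts (NOT named `w_…`: the walker clears its own names at the first freeze)
  have w_rip := hframe.rip
  have v_rsp : v.reg .rsp = e.reg .rsp - 1480 := by
    rw [hframe.rsp, hR]
    have h1 := addr_sub_lit (e.reg .rsp).toNat 1480 (by omega)
    rw [addr_toNat] at h1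
    exact h1.symm
  obtain ⟨r, hr⟩ : ∃ r, resAt g v.mem i = r := ⟨_, rfl⟩
  have v_r13 := hr13
  have v_r14 := hr14
  have v_rbx : v.reg .rbx = addr r := by
    rw [← hr]
    exact hrbx
  have w_eq : Mem.EqOn Vorbis.L.textLo Vorbis.L.textHi u₀.mem v.mem := hframe.code
  have hdf : v.flags .df = false := (show abiInv _ from hframe.inv).1
  have hmx : v.mxcsr &&& 0x1F80 = 0x1F80 := (show abiInv _ from hframe.inv).2
  have hsse := Vorbis.sseOK_of_abiInv hframe.inv
  -- 3. where the objects are, and the values the segment loads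
  have hfw := obj_where hframe hhand
  rw [hRA] at hfw
  have hL : BlkLive (g.Blk A) (g.Live A) := hmid.env.live
  have hLa : BlkLive A.1.Blk (g.Live A) := hL.sub (fun B hB => runBlk_setup hB)
  have hlt := hcur.lt
  have hR1 := hres.R1
  -- the residue_config block and the record `r`
  have hR2 : A.1.Blk ⟨stb_vorbis.residue_config v.mem g.f, Off.sizeof.Residue * (stb_vorbis.residue_count v.mem g.f).toNat⟩ :=
    hres.upTo.R2
  have hrw : 0x100000 ≤ r ∧ r + 32 ≤ 0xC00000 ∧ (r + 32 ≤ 0x700000 ∨ 0x800000 ≤ r) := by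
    have h1 := hmid.arena.block_off hR2
    rw [← hr]
    simp only [resAt, stb_vorbis.residue_config_at, voff] at h1 ⊢
    omega
  -- the codebooks block and the class book
  obtain ⟨cbs, hcbs⟩ : ∃ c, stb_vorbis.codebooks v.mem g.f = c := ⟨_, rfl⟩
  obtain ⟨cb, hcb⟩ : ∃ c, Residue.classbook v.mem r = c := ⟨_, rfl⟩
  have hcb_lt : cb < 256 := by
    rw [← hcb]
    simp only [vacc, voff]
    exact Mem.u8_lt _ _
  have hR7 : (cb : Int) < stb_vorbis.codebook_count v.mem g.f := by
    have := hcur.R7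
    rw [hr, hcb] at this
    exact this
  have hcbok := (hmid.own.cb0 (by omega)).ok (hmid.own.nonnull (by omega))
  have hF2 : A.1.Blk ⟨cbs, Off.sizeof.Codebook * (stb_vorbis.codebook_count v.mem g.f).toNat⟩ := by
    rw [← hcbs]
    exact hcbok.F2.mono hmid.extc
  have hcw : 0x100000 ≤ cbs + 2120 * cb ∧ cbs + 2120 * cb + 2120 ≤ 0xC00000 ∧
      (cbs + 2120 * cb + 2120 ≤ 0x700000 ∨ 0x800000 ≤ cbs + 2120 * cb) := by
    have h1 := hmid.arena.block_off hF2
    have h2 := hcbok.F1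
    simp only [voff] at h1
    omega
  have ld1 : v.mem.readLE (addr g.f + 168) 8 = cbs := by
    rw [← hcbs]
    simp only [vfield, vacc, voff]
  have ld2 : v.mem.readLE (addr r + 13) 1 = cb := by
    rw [← hcb]
    simp only [vfield, vacc, voff]
  clear hrbx
  have hfa : (addr g.f).toNat = g.f := toNat_addr _ (by omega)
  have hra : (addr r).toNat = r := toNat_addr _ (by omega)
  have hca : (UInt64.ofNat cbs).toNat = cbs := toNat_addr _ (by omega)
  have hza : (Word.ofBV (BitVec.setWidth 64 (BitVec.zeroExtend 32 (BitVec.ofNat 8 cb)))).toNat = cb := by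
    rw [zx8 cb hcb_lt]
    exact toNat_addr _ (by omega)
  obtain ⟨E32, ld3⟩ : ∃ x, v.mem.readLE (UInt64.ofNat cbs +
      Word.ofBV (BitVec.setWidth 64 (BitVec.zeroExtend 32 (BitVec.ofNat 8 cb))) * 2120 + 4) 4 = x := ⟨_, rfl⟩
  have hsm' := hsm A.2 g.frames' A.1
  u_walk hcode [hμ.vendor] until [Vorbis.L.start_decoder.cut265, Vorbis.L.start_decoder.cut4] span [Vorbis.L.textLo, Vorbis.L.textHi] side (v_side)
  case check_115d03 =>
    -- 0x115d03, C line 4076: load8 `f->codebooks` (OB1)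
    have hun : ShadowUntouched v.mem s_115d03.mem := by v_untouched
    have hs : Site (g.Live A) (g.f + 168) 8 := hmid.bits.site_field hL 168 8 (by omega) (by omega) rfl
    exact Vorbis.Spec.check_site hframe.shadow hun hs (by u_omega)
  case check_115d13 =>
    -- 0x115d13, C line 4076: load1 `r->classbook` (R2, i < residue_count)
    have hun : ShadowUntouched v.mem s_115d13.mem := by v_untouched
    have hs : Site (g.Live A) (r + 13) 1 := by
      apply hres.upTo.site_record hLa hlt 13 1 (by simp only [voff]; omega) (by omega)
      rw [← hr]
      rfl
    exact Vorbis.Spec.check_site hframe.shadow hun hs (by u_omega)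
  case check_115d2b =>
    -- 0x115d2b, C line 4076: load4 `f->codebooks[r->classbook].entries` (CB0 + R7)
    have hun : ShadowUntouched v.mem s_115d2b.mem := by v_untouched
    have hs : Site (g.Live A) (cbs + 2120 * cb + 4) 4 := by
      have h2 := hcbok.F1
      apply Site.of_blk hLa hF2
      · simp only []
        omega
      · simp only [voff]
        omega
      · omega
    exact Vorbis.Spec.check_site hframe.shadow hun hs (by u_omega)
  case call_inv =>
    v_inv
  case pre_115d3b =>
    -- 0x115d3b: `setup_malloc(f, 8·E)`: the allocator's precondition
    show ArenaPre A.1 A.2 g.frames' s_115d3b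
    have hun : ShadowUntouched v.mem s_115d3b.mem := by v_untouched
    have hrsp : (s_115d3b.reg .rsp).toNat + 8 = g.R := by
      rw [w_rsp, hR]
      u_omega
    have hsh : ShadowPre A.2 g.frames' s_115d3b := by
      refine ⟨?_, hframe.offText⟩
      rw [hrsp]
      exact hframe.shadow.untouched hun
    have hrdi : (s_115d3b.reg .rdi).toNat = g.f := by
      rw [w_rdi]
      exact hfa
    refine ⟨hsh, ?_, ?_, hhand.arenaText⟩
    · rw [hrdi]
      exact (hhand.obj.mono (frames_sub g A.2)).blockLive
    · rw [hrdi, w_mem]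
      apply hmid.arena.frame (by simp only [voff]; omega)
      simp only [voff]
      exact Mem.EqOn.writeLE _ _ _ _ _ _ (by u_omega) (by u_omega)
  -- 0x115d40: after `setup_malloc` returned: the rest of the unit
  exact hcont e r cbs cb E32 s_115d3b s_115d3br hge hr hcbs hcb ld3 w_rsi_115d3b w_rsp_115d3b w_rdi_115d3b w_mem_115d3b
    w_rip w_rsp w_kept w_r12 w_rbp w_same w_code w_inv w_post

/-- `movsxd rdx, dword [m] ; shl rdx, 3` of a count below 2^24: the register holds `8·E`, no wrap. -/
theorem rdx_val (E32 : Nat) (h : E32 < 2 ^ 24) :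
    (Word.ofBV (BitVec.signExtend 64 (BitVec.ofNat 32 E32)) <<< 3).toNat = 8 * E32 := by
  have h1 : (BitVec.ofNat 32 E32).toNat = E32 := by
    rw [BitVec.toNat_ofNat]
    omega
  have h2 := toNat_sext32 (BitVec.ofNat 32 E32) (by omega)
  rw [h1] at h2
  rw [UInt64.toNat_shiftLeft, h2, Nat.shiftLeft_eq]
  have e3 : (3 : UInt64).toNat % 64 = 3 := by decide
  rw [e3]
  omega

/-- The live set grows with the list of live objects (one more arena block). -/
theorem live_cons (frames : List (Nat × FrameLayout)) (o : Obj) (others : List Obj) (x : Nat)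
    (h : Asan.Live (stackObjs frames ++ others) x) : Asan.Live (stackObjs frames ++ (o :: others)) x := by
  obtain ⟨o', ho', hb⟩ := h
  refine ⟨o', ?_, hb⟩
  rcases List.mem_append.mp ho' with h1 | h2
  · exact List.mem_append_left _ h1
  · exact List.mem_append_right _ (List.mem_cons_of_mem _ h2)

/-- **`Mid` OVER A SUCCESSFUL ALLOCATION** (the lemma `Mid.frame` / `Mid.grow` do not give: `setup_malloc` changes the shadow of the
new block, `setup_offset` and the ghost arena AT ONCE, so neither of the two applies, in either order): the proof of `Mid.frame`
with the arena-dependent clauses (`Env`, `ArenaOK`, `temps = []`, `Bits`) given for the GROWN ghost `A'` in the new memory. The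
memory may also contain the segment's later stores (the windows `Mid.winsAt k z` of `*f` and the blocks of `Ac` are kept). -/
theorem mid_alloc {g : Ghost} {k kc z : Nat} {Ac : Arena} {A A' : Arena × List Obj} {mem mem' : Mem} (h : Mid g k kc z Ac A mem)
    (he : ObjEq (Mid.winsAt k z) mem g.f mem' g.f) (hk : ∀ B, Ac.Blk B → B.Kept mem mem')
    (hconsts : SDFrameConsts kc mem' g.R) (hslot : 6 ≤ k → k ≤ 9 → mem'.i32 (g.R + 0x28) = mem.i32 (g.R + 0x28))
    (hext : A.1.Extends A'.1) (henv : Env (g.Blk A') (g.Live A') mem') (harena : ArenaOK A'.1 A'.2 mem' g.f)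
    (hno : A'.1.temps = []) (hbits : Bits (g.Blk A') g.len mem' g.f) : Mid g k kc z Ac A' mem' := by
  have hge := Mid.hi_ge k
  have m0 : ((0, 8) : Nat × Nat) ∈ Mid.winsAt k z := List.mem_cons_self
  have m1 : ((24, 48) : Nat × Nat) ∈ Mid.winsAt k z := List.mem_cons_of_mem _ List.mem_cons_self
  have m2 : ((152, Mid.hi k) : Nat × Nat) ∈ Mid.winsAt k z :=
    List.mem_cons_of_mem _ (List.mem_cons_of_mem _ List.mem_cons_self)
  have m3 : ((restFrom z, 1480) : Nat × Nat) ∈ Mid.winsAt k z :=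
    List.mem_cons_of_mem _ (List.mem_cons_of_mem _ (List.mem_cons_of_mem _ List.mem_cons_self))
  have m4 : ((1749, 1750) : Nat × Nat) ∈ Mid.winsAt k z :=
    List.mem_cons_of_mem _ (List.mem_cons_of_mem _ (List.mem_cons_of_mem _ (List.mem_cons_of_mem _ List.mem_cons_self)))
  have m5 : ((1784, 1788) : Nat × Nat) ∈ Mid.winsAt k z :=
    List.mem_cons_of_mem _ (List.mem_cons_of_mem _ (List.mem_cons_of_mem _ (List.mem_cons_of_mem _
      (List.mem_cons_of_mem _ List.mem_cons_self))))
  have hkc : ∀ B, Ac.Blk B → B.Kept mem mem' := hk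
  have heown : ObjEq (Own.winsAt k) mem g.f mem' g.f := by
    apply he.sub
    intro w hw
    simp only [Own.winsAt, List.mem_cons, List.mem_nil_iff, or_false] at hw
    rcases hw with rfl | rfl | rfl
    · exact ⟨(0, 8), m0, by simp only []; omega, by simp only []; omega⟩
    · exact ⟨(24, 48), m1, Nat.le_refl _, Nat.le_refl _⟩
    · exact ⟨(152, Mid.hi k), m2, by simp only []; omega, Nat.le_refl _⟩
  have hown := h.own.frame heown hkc
  refine ⟨henv, ?_, harena, hno, h.extc.trans hext, hbits, ?_, ?_, ?_, hown, ?_, ?_, ?_⟩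
  · exact hconsts
  · have e : stb_vorbis.first_decode mem' g.f = stb_vorbis.first_decode mem g.f := by
      simp only [vacc, voff]
      exact he.u8 1749 ⟨(1749, 1750), m4, Nat.le_refl _, Nat.le_refl _⟩
    rw [e]
    exact h.first
  · have e : stb_vorbis.discard_samples_deferred mem' g.f = stb_vorbis.discard_samples_deferred mem g.f := by
      simp only [vacc, voff]
      exact he.i32 1784 ⟨(1784, 1788), m5, Nat.le_refl _, Nat.le_refl _⟩
    rw [e]
    exact h.discard0
  · apply h.header.transfer
    apply he.sub
    intro w hw
    simp only [HeaderOK.wins, List.mem_cons, List.mem_nil_iff, or_false] at hw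
    rcases hw with rfl | rfl
    · exact ⟨(0, 8), m0, Nat.le_refl _, Nat.le_refl _⟩
    · exact ⟨(152, Mid.hi k), m2, Nat.le_refl _, by simp only []; omega⟩
  · -- the slot of longest_floorlist and `values` of every floor
    intro h6 h9
    obtain ⟨h1, h2, h3⟩ := h.lfl h6 h9
    have hb6 := Mid.hi_ge6 h6
    have hfl := h.own.floor h6
    have eslot : mem'.i32 (g.R + 0x28) = mem.i32 (g.R + 0x28) := hslot h6 h9
    have ecount : stb_vorbis.floor_count mem' g.f = stb_vorbis.floor_count mem g.f := by
      simp only [vacc, voff]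
      exact he.i32 176 ⟨(152, Mid.hi k), m2, by simp only []; omega, by simp only []; omega⟩
    have ecfg : stb_vorbis.floor_config mem' g.f = stb_vorbis.floor_config mem g.f := by
      simp only [vacc, voff]
      exact he.u64 312 ⟨(152, Mid.hi k), m2, by simp only []; omega, by simp only []; omega⟩
    have hkept := hkc _ hfl.FL2
    refine ⟨by rw [eslot]; exact h1, by rw [eslot]; exact h2, ?_⟩
    intro i hi
    rw [ecount] at hi
    have eat : stb_vorbis.floor_config_at mem' g.f i = stb_vorbis.floor_config_at mem g.f i := by
      simp only [stb_vorbis.floor_config_at]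
      rw [ecfg]
    have hcnt := hfl.FL1
    have ev : Floor1.values mem' (stb_vorbis.floor_config_at mem g.f i) = Floor1.values mem (stb_vorbis.floor_config_at mem g.f i) := by
      simp only [Floor1.values, stb_vorbis.floor_config_at, voff]
      apply hkept.i32
      · simp only [floorBlock, voff]
        omega
      · simp only [floorBlock, voff]
        omega
    rw [eat, ev, eslot]
    exact h3 i hi
  · intro h9
    have hb9 := Mid.hi_ge9 h9
    apply (h.mode h9).transfer
    apply he.sub
    intro w hw
    simp only [ModeOK.wins, List.mem_cons, List.mem_nil_iff, or_false] at hw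
    rcases hw with rfl | rfl
    · exact ⟨(152, Mid.hi k), m2, by simp only []; omega, by simp only []; omega⟩
    · exact ⟨(152, Mid.hi k), m2, by simp only []; omega, by simp only []; omega⟩
  · -- the zero rest
    intro o ho1 ho2
    have hz := h.rest o ho1 ho2
    simp only [voff] at ho2
    rw [he (restFrom z, 1480) m3 o ho1 ho2]
    exact hz


/-- **FRAME OF RES(i) WITH ITS AGES, FINE FORM**: the frozen `ResidueUpTo.transfer_below` asks `Kept` of the WHOLE `residue_config`
block; a store into record `j ≥ i` of that block (`r->classdata = …` at 0x115d4c; the field stores of R3, R4) violates it. Here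
only the 32 bytes of every FINISHED record are asked (`hrec`), the codebooks block (`hcb`) and the blocks the finished records own
(`hown`); the windows `ResidueUpTo.wins i` of `*f` read the same. -/
theorem resTrans_frame {A6 A6c Ai A : Arena} {mem mem' : Mem} {f i : Nat} (h : ResTrans A6 A6c Ai A mem f i)
    (he : ObjEq (ResidueUpTo.wins i) mem f mem' f)
    (hrec : ∀ i', i' < i → (Block.mk (stb_vorbis.residue_config_at mem f i') Off.sizeof.Residue).Kept mem mem')
    (hcb : (Block.mk (stb_vorbis.codebooks mem f)
      (Off.sizeof.Codebook * (stb_vorbis.codebook_count mem f).toNat)).Kept mem mem')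
    (hown : ∀ i', i' < i → ∀ B, ResidueAtOK.Owns mem f (stb_vorbis.residue_config_at mem f i') B → B.Kept mem mem') :
    ResTrans A6 A6c Ai A mem' f i := by
  have ecount : stb_vorbis.residue_count mem' f = stb_vorbis.residue_count mem f := by
    simp only [vacc, voff]
    apply he.i32 320
    apply InWins.of_mem _ (ResidueUpTo.wins_types i)
    · exact Nat.le_refl _
    · show 320 + 4 ≤ 324 + 2 * i
      omega
  have econf : stb_vorbis.residue_config mem' f = stb_vorbis.residue_config mem f := by
    simp only [vacc, voff]
    exact he.u64 456 (InWins.of_mem _ (ResidueUpTo.wins_config i) (Nat.le_refl _) (Nat.le_refl _))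
  have eat : ∀ k, stb_vorbis.residue_config_at mem' f k = stb_vorbis.residue_config_at mem f k := by
    intro k
    unfold stb_vorbis.residue_config_at
    rw [econf]
  refine ⟨h.ext6, h.ext6c, h.exti, ?_, ?_, ?_, ?_, ?_⟩
  · rw [ecount]
    exact h.n_le
  · rw [ecount]
    exact h.R1
  · rw [ecount, econf]
    exact h.R2
  · intro k hk
    have e : stb_vorbis.residue_types mem' f k = stb_vorbis.residue_types mem f k := by
      simp only [vacc, voff]
      have hw : InWins (ResidueUpTo.wins i) (324 + 2 * k) 2 := by
        apply InWins.of_mem _ (ResidueUpTo.wins_types i)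
        · show 320 ≤ 324 + 2 * k
          omega
        · show 324 + 2 * k + 2 ≤ 324 + 2 * i
          omega
      exact he.u16_at (324 + 2 * k) hw (by omega) (by omega)
    rw [e]
    exact h.R3 k hk
  · intro k hk
    rw [eat k]
    have hrk := h.record k hk
    have h7 := hrk.R7
    have hcbk : (Block.mk (Residue.cbk mem f (stb_vorbis.residue_config_at mem f k)) 8).Kept mem mem' := by
      apply hcb.mono
      · simp only [vacc, voff]
        omega
      · simp only [vacc, voff] at h7 ⊢
        omega
    have hrd := ResidueReads.of_kept (he.sub (ResidueUpTo.wins_sub_at i)) (hrec k hk) hcbk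
    exact hrk.frame hrd (hown k hk) (fun _ _ hb => hb)

/-- RES(i) with its ages after the ghost arena grew. -/
theorem resTrans_grow {A6 A6c Ai A A' : Arena} {mem : Mem} {f i : Nat} (h : ResTrans A6 A6c Ai A mem f i)
    (hext : A.Extends A') : ResTrans A6 A6c Ai A' mem f i :=
  ⟨h.ext6, h.ext6c, h.exti.trans hext, h.n_le, h.R1, h.R2, h.R3, h.record⟩

/-- **From the return of `setup_malloc` (0x115d40) to BOTH exits of the segment** (the other 26
instructions, C lines 4076 – 4079): the store8 check 0x115d47 (`r->classdata`), the NULL test; on the failure path `error`'s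
precondition (0x115d5d) and the jump to the epilogue 0x113b22; on the success path the three check sites of line 4078 (0x115d6e,
0x115d7e, 0x115d95: the same addresses as in line 4076, now under the GROWN live set of `setup_malloc`'s post), `memset`'s
precondition (0x115daa: `rdx = 8·E = n` by K1 — `E < 2^24`, so neither `shl esi, 3` nor `movsxd ; shl rdx, 3` wraps —, the new
block is ONE live object), the two spills, the cut point 0x115db9. EVERY check site and EVERY callee precondition of the unit is
discharged here. The two EXIT ASSERTIONS are the hypotheses `hexitS` (`AtR7`: `exit_R7`) and `hexitE` (`AtERR`: `exit_ERR`) over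
everything the walker knows about the final states (on the failure path: the FAILURE CLAUSE of `setup_malloc.spec`, the footprint
`[stack, f+8..12]`, instead of the call rule's `w_same`, whose shadow window escapes for a refused stream-sized request). -/
theorem from_malloc_return (Lay : Layout) (hLay : Lay.hi = 0x1000000) (μ : Microarch) (hμ : UserX.MicroOK μ) (u₀ : State)
    (hcode : HasCodeNat Lay u₀ Vorbis.L.start_decoder.entry Vorbis.Code.code_start_decoder.nat Vorbis.L.start_decoder.size)
    (hload8 : Asan.SmallCheck Lay μ Vorbis.WayInv (Vorbis.CodeOK u₀) [.rax, .rcx, .rdx] 8 Vorbis.L.__asan_load8_noabort.entry)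
    (hload1 : Asan.SmallCheck Lay μ Vorbis.WayInv (Vorbis.CodeOK u₀) [.rax, .rdx] 1 Vorbis.L.__asan_load1_noabort.entry)
    (hload4 : Asan.SmallCheck Lay μ Vorbis.WayInv (Vorbis.CodeOK u₀) [.rax, .rcx, .rdx] 4 Vorbis.L.__asan_load4_noabort.entry)
    (hstore8 : Asan.SmallCheck Lay μ Vorbis.WayInv (Vorbis.CodeOK u₀) [.rax, .rcx, .rdx] 8 Vorbis.L.__asan_store8_noabort.entry)
    (herr : ∀ (others : List Obj) (frames : List (Nat × FrameLayout)),
      Calls Lay μ Vorbis.WayInv (Vorbis.conv u₀) Vorbis.L.error.entry (Vorbis.Spec.error.spec others frames))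
    (hmemset : ∀ (others : List Obj) (frames : List (Nat × FrameLayout)),
      Calls Lay μ Vorbis.WayInv (Vorbis.conv u₀) Vorbis.L.memset.entry (Vorbis.Spec.memset.spec others frames))
    (g : Ghost) (i : Nat) (v : State) (A6 A6c Ai : Arena) (A : Arena × List Obj) (hb : BodyR6 u₀ g i A6 A6c Ai A v)
    (e : State) (r cbs cb E32 : Nat) (sb sr : State)
    (hge : g.e = e) (hr : resAt g v.mem i = r) (hcbs : stb_vorbis.codebooks v.mem g.f = cbs)
    (hcb : Residue.classbook v.mem r = cb)
    (ld3 : v.mem.readLE (UInt64.ofNat cbs +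
        Word.ofBV (BitVec.setWidth 64 (BitVec.zeroExtend 32 (BitVec.ofNat 8 cb))) * 2120 + 4) 4 = E32)
    (hsi : sb.reg .rsi = Word.ofBV (BitVec.ofNat 32 E32 <<< 3))
    (hsp : sb.reg .rsp = e.reg .rsp - 1488)
    (hdi : sb.reg .rdi = addr g.f)
    (hsbm : sb.mem = v.mem.writeLE (e.reg .rsp - 1488) 8 1137984)
    (w_rip : sr.rip = 1137984)
    (w_rsp : sr.reg .rsp = e.reg .rsp - 1480)
    (w_kept : RegsKept [.rsi, .r12, .rsp, .rdi, .rbp, .rax, .rcx, .rdx, .r8, .r9, .r10, .r11, .r16, .r17, .r18, .r19, .r20, .r21,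
        .r22, .r23, .r24, .r25, .r26, .r27, .r28, .r29, .r30, .r31] v sr)
    (w_r12 : sr.reg .r12 = UInt64.ofNat cbs + Word.ofBV (BitVec.setWidth 64 (BitVec.zeroExtend 32 (BitVec.ofNat 8 cb))) * 2120)
    (w_rbp : sr.reg .rbp = addr g.f)
    (w_same : Mem.SameExcept ((setup_malloc.spec A.2 g.frames' A.1).footprint sb) sb.mem sr.mem)
    (w_code : (conv u₀).code.In sr.mem)
    (w_inv : (conv u₀).inv sr)
    (w_post : (setup_malloc.spec A.2 g.frames' A.1).post sb sr)
    (hexitS : ∀ (n p : Nat) (sm s : State),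
      (Word.ofBV (BitVec.ofNat 32 E32 <<< 3)).toNat % 2 ^ 32 = n → n = 8 * E32 → E32 < 2 ^ 24 →
      A.1.Fits n → A.1.B + A.1.S + 32 = p →
      ArenaOK (A.1.pushSetup n) (A.1.newSetupObj n :: A.2) sr.mem g.f →
      ShadowInv (A.1.newSetupObj n :: A.2) g.frames' g.R sr.mem →
      Mem.SameExcept
        [{ lo := (e.reg .rsp - 1488).toNat - 80, hi := (e.reg .rsp - 1488).toNat },
          { lo := (addr g.f).toNat + 8, hi := (addr g.f).toNat + 12 },
          { lo := (addr g.f).toNat + 128, hi := (addr g.f).toNat + 132 },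
          { lo := 12582912 + (A.1.B + A.1.S + 32) / 8, hi := 12582912 + (A.1.B + A.1.S + 32 + n + 7) / 8 }]
        (v.mem.writeLE (e.reg .rsp - 1488) 8 1137984) sr.mem →
      Mem.SameExcept
        [{ lo := (e.reg .rsp - 1488).toNat - 64, hi := (e.reg .rsp - 1488).toNat }, { lo := p, hi := p + n }]
        (((sr.mem.writeLE (e.reg .rsp - 1488) 8 1137996).writeLE (addr r + 16) 8 p).writeLE (e.reg .rsp - 1488) 8
          1138095) sm.mem →
      ShadowUntouched sr.mem sm.mem →
      sm.flags .df = false → sm.mxcsr &&& 8064 = 8064 →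
      sm.mem.readLE (e.reg .rsp - 1444) 4 = 0 →
      s.rip = 1138105 → s.reg .r13 = Word.ofBV 0#32 → s.reg .rsp = e.reg .rsp - 1480 → s.reg .rbp = addr g.f →
      RegsKept [.r13, .rsi, .r12, .rsp, .rdi, .rbp, .rax, .rcx, .rdx, .r8, .r9, .r10, .r11, .r16, .r17, .r18, .r19, .r20,
        .r21, .r22, .r23, .r24, .r25, .r26, .r27, .r28, .r29, .r30, .r31] v s →
      s.mem = sm.mem.writeLE (e.reg .rsp - 1424) 4 (Word.part Width.w32 (addr i)).toNat →
      Mem.EqOn 1048576 1154368 u₀.mem s.mem → s.flags = sm.flags → s.mxcsr = sm.mxcsr →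
      AtR7 u₀ g i s)
    (hexitE : ∀ (n : Nat) (se s : State),
      (Word.ofBV (BitVec.ofNat 32 E32 <<< 3)).toNat % 2 ^ 32 = n → ¬ A.1.Fits n →
      ArenaOK A.1 A.2 sr.mem g.f → ShadowUntouched v.mem sr.mem →
      Mem.SameExcept
        [{ lo := (e.reg .rsp - 1488).toNat - 80, hi := (e.reg .rsp - 1488).toNat },
          { lo := g.f + 8, hi := g.f + 12 }]
        (v.mem.writeLE (e.reg .rsp - 1488) 8 1137984) sr.mem →
      Mem.SameExcept
        [{ lo := (e.reg .rsp - 1488).toNat - 48, hi := (e.reg .rsp - 1488).toNat },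
          { lo := (addr g.f).toNat + 140, hi := (addr g.f).toNat + 140 + 4 }]
        (((sr.mem.writeLE (e.reg .rsp - 1488) 8 1137996).writeLE (addr r + 16) 8 0).writeLE (e.reg .rsp - 1488) 8
          1138018) se.mem →
      ShadowUntouched sr.mem se.mem →
      se.flags .df = false → se.mxcsr &&& 8064 = 8064 →
      s.rip = 1129250 → s.reg .rsp = e.reg .rsp - 1480 → s.reg .rax = 0 →
      RegsKept [.rsi, .r12, .rsp, .rdi, .rbp, .rax, .rcx, .rdx, .r8, .r9, .r10, .r11, .r16, .r17, .r18, .r19, .r20, .r21,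
        .r22, .r23, .r24, .r25, .r26, .r27, .r28, .r29, .r30, .r31] v s →
      s.mem = se.mem → Mem.EqOn 1048576 1154368 u₀.mem s.mem → s.flags = se.flags → s.mxcsr = se.mxcsr →
      AtERR u₀ g s) :
    ReachVia Lay μ WayInv sr (fun w => AtR7 u₀ g i w ∨ AtERR u₀ g w) := by
  obtain ⟨hloop, hr13, hr14, hrbx, hcur⟩ := hb
  obtain ⟨hframe, hhand, hmid, hile, hres, hzero⟩ := hloop
  have he : AtEntry (conv u₀) Vorbis.L.start_decoder.entry depth g.ret e := by
    rw [← hge]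
    exact hframe.entry
  v_entry he
  simp only [depth] at he_room he_stack
  have hRA : g.RA = (e.reg .rsp).toNat := by
    unfold Ghost.RA
    rw [hge]
  have hR : g.R = (e.reg .rsp).toNat - 1480 := by
    unfold Ghost.R steady
    rw [hRA]
  have v_r13 := hr13
  have v_r14 := hr14
  have v_rbx : v.reg .rbx = addr r := by
    rw [← hr]
    exact hrbx
  clear hrbx
  -- where the objects are
  have hfw := obj_where hframe hhand
  rw [hRA] at hfw
  have hout := hhand.objOut
  simp only [voff] at hout
  have hatext : 0x119d40 ≤ A.1.B := hhand.arenaText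
  have hb := hmid.arena.bounds
  have hL : BlkLive (g.Blk A) (g.Live A) := hmid.env.live
  have hLa : BlkLive A.1.Blk (g.Live A) := hL.sub (fun B hB => runBlk_setup hB)
  have hlt := hcur.lt
  have hR1 := hres.R1
  have hR2 : A.1.Blk ⟨stb_vorbis.residue_config v.mem g.f, Off.sizeof.Residue * (stb_vorbis.residue_count v.mem g.f).toNat⟩ :=
    hres.upTo.R2
  have hrw : 0x119d40 ≤ r ∧ r + 32 ≤ 0xC00000 ∧ (r + 32 ≤ 0x700000 ∨ 0x800000 ≤ r) ∧ A.1.B ≤ r ∧ r + 32 ≤ A.1.B + A.1.S := by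
    have h1 := hmid.arena.block_off hR2
    have h2 := hmid.arena.block_range hR2
    have h3 := le_r8 (Off.sizeof.Residue * (stb_vorbis.residue_count v.mem g.f).toNat)
    rw [← hr]
    simp only [resAt, stb_vorbis.residue_config_at, voff] at h1 h2 h3 ⊢
    omega
  have hcb_lt : cb < 256 := by
    rw [← hcb]
    simp only [vacc, voff]
    exact Mem.u8_lt _ _
  have hR7 : (cb : Int) < stb_vorbis.codebook_count v.mem g.f := by
    have := hcur.R7
    rw [hr, hcb] at this
    exact this
  have hcbok := (hmid.own.cb0 (by omega)).ok (hmid.own.nonnull (by omega))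
  have hF1 := hcbok.F1
  have hF2 : A.1.Blk ⟨cbs, Off.sizeof.Codebook * (stb_vorbis.codebook_count v.mem g.f).toNat⟩ := by
    rw [← hcbs]
    exact hcbok.F2.mono hmid.extc
  have hcw : 0x100000 ≤ cbs + 2120 * cb ∧ cbs + 2120 * cb + 2120 ≤ 0xC00000 ∧
      (cbs + 2120 * cb + 2120 ≤ 0x700000 ∨ 0x800000 ≤ cbs + 2120 * cb) ∧
      A.1.B ≤ cbs + 2120 * cb ∧ cbs + 2120 * cb + 2120 ≤ A.1.B + A.1.S := by
    have h1 := hmid.arena.block_off hF2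
    have h2 := hmid.arena.block_range hF2
    have h3 := le_r8 (Off.sizeof.Codebook * (stb_vorbis.codebook_count v.mem g.f).toNat)
    simp only [voff] at h1 h2 h3
    omega
  have hcr : cbs + 2120 * cb + 2120 ≤ r ∨ r + 32 ≤ cbs + 2120 * cb := by
    have hd := hmid.arena.old_disjoint_since hmid.extc hcbok.F2 (hres.R2.mono (hres.ext6c.trans hres.exti))
    rw [hcbs] at hd
    rw [← hr]
    simp only [vblock, resAt, stb_vorbis.residue_config_at, voff] at hd ⊢
    omega
  have ld1 : v.mem.readLE (addr g.f + 168) 8 = cbs := by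
    rw [← hcbs]
    simp only [vfield, vacc, voff]
  have ld2 : v.mem.readLE (addr r + 13) 1 = cb := by
    rw [← hcb]
    simp only [vfield, vacc, voff]
  have hfa : (addr g.f).toNat = g.f := toNat_addr _ (by omega)
  have hra : (addr r).toNat = r := toNat_addr _ (by omega)
  have hca : (UInt64.ofNat cbs).toNat = cbs := toNat_addr _ (by omega)
  have hza : (Word.ofBV (BitVec.setWidth 64 (BitVec.zeroExtend 32 (BitVec.ofNat 8 cb)))).toNat = cb := by
    rw [zx8 cb hcb_lt]
    exact toNat_addr _ (by omega)
  v_after_call hsp hsbm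
  simp only [hdi, hsi, shadowSpan] at w_same
  obtain ⟨n, hn⟩ : ∃ n, (Word.ofBV (BitVec.ofNat 32 E32 <<< 3)).toNat % 2 ^ 32 = n := ⟨_, rfl⟩
  rw [hn] at w_same
  have hpost : (A.1.Fits n → (sr.reg .rax).toNat = A.1.B + A.1.S + 32 ∧
      ArenaOK (A.1.pushSetup n) (A.1.newSetupObj n :: A.2) sr.mem g.f ∧
      ShadowInv (A.1.newSetupObj n :: A.2) g.frames' g.R sr.mem) ∧
      (¬ A.1.Fits n → sr.reg .rax = 0 ∧ ArenaOK A.1 A.2 sr.mem g.f ∧ ShadowUntouched sb.mem sr.mem ∧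
        Mem.SameExcept [{ lo := (sb.reg .rsp).toNat - 80, hi := (sb.reg .rsp).toNat }, { lo := g.f + 8, hi := g.f + 12 }]
          sb.mem sr.mem) := by
    have h := w_post
    simp only [setup_malloc.spec, hsi, hdi, hn, hfa] at h
    have e1 : (sb.reg .rsp).toNat + 8 = g.R := by
      rw [hsp, hR]
      u_omega
    rw [e1] at h
    exact h
  have hsame1 := w_same
  have hunb : ShadowUntouched v.mem sb.mem := by
    rw [hsbm]
    v_untouched
  have herr' := herr A.2 g.frames'
  by_cases hfit : A.1.Fits n
  · -- the allocation SUCCEEDED: rax = p = B + S + 32, the ghost arena grew, one more live object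
    obtain ⟨hrax, harena1, hshadow1⟩ := hpost.1 hfit
    obtain ⟨p, hp⟩ : ∃ p, A.1.B + A.1.S + 32 = p := ⟨_, rfl⟩
    rw [hp] at hrax w_same
    have hnewblk : (A.1.pushSetup n).Blk ⟨p, n⟩ := by
      rw [← hp]
      exact A.1.blk_pushSetup n
    have hpw : 0x119d40 ≤ p ∧ p + n ≤ 0xC00000 ∧ (p + n ≤ 0x700000 ∨ 0x800000 ≤ p) ∧ A.1.B + A.1.S + 32 = p ∧
        p + n ≤ A.1.B + A.1.L := by
      have h1 := harena1.block_off hnewblk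
      have h2 := arena_inside harena1 hnewblk
      simp only [varena] at h2
      simp only [] at h1 h2
      omega
    have w_rax : sr.reg .rax = addr p := eq_addr _ _ hrax
    have hpa : (addr p).toNat = p := toNat_addr _ (by omega)
    have hmemset' := hmemset (A.1.newSetupObj n :: A.2) g.frames'
    -- the size: E = entries < 2^24 (K1), so `shl esi, 3` does not wrap
    have ld3' : v.mem.u32 (cbs + cb * 2120 + 4) = E32 := by
      rw [← ld3, zx8 cb hcb_lt]
      show v.mem.readLE (addr (cbs + cb * 2120 + 4)) 4 = v.mem.readLE (addr cbs + addr cb * 2120 + 4) 4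
      simp only [vfield]
    have hk1 := (hmid.own.books (by omega) cb hR7).K1
    have hE : E32 < 2 ^ 24 := by
      have h1 := hk1.ent_nonneg
      have h2 := hk1.ent_lt
      simp only [stb_vorbis.codebooks_at, hcbs] at h1 h2
      simp only [Codebook.entries, voff] at h1 h2
      have h3 := v.mem.i32_cases (cbs + 2120 * cb + 4)
      have e1 : cbs + 2120 * cb + 4 = cbs + cb * 2120 + 4 := by omega
      rw [e1, ld3'] at h3
      rw [e1] at h1 h2
      omega
    have hn8 : n = 8 * E32 := by
      rw [← hn, toNat_ofBV32, BitVec.toNat_shiftLeft, BitVec.toNat_ofNat, Nat.shiftLeft_eq]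
      omega
    -- the values the second half loads, read through the callee's footprint
    have p1 : sb.mem.readLE (addr g.f + 168) 8 = cbs := by
      rw [hsbm]
      u_read
    rw [hsbm] at p1
    have q1 : sr.mem.readLE (addr g.f + 168) 8 = cbs := by
      u_frame p1
    have p2 : sb.mem.readLE (addr r + 13) 1 = cb := by
      rw [hsbm]
      u_read
    rw [hsbm] at p2
    have q2 : sr.mem.readLE (addr r + 13) 1 = cb := by
      u_frame p2
    have p3 : sb.mem.readLE (UInt64.ofNat cbs +
        Word.ofBV (BitVec.setWidth 64 (BitVec.zeroExtend 32 (BitVec.ofNat 8 cb))) * 2120 + 4) 4 = E32 := by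
      rw [hsbm]
      u_read
    rw [hsbm] at p3
    have q3 : sr.mem.readLE (UInt64.ofNat cbs +
        Word.ofBV (BitVec.setWidth 64 (BitVec.zeroExtend 32 (BitVec.ofNat 8 cb))) * 2120 + 4) 4 = E32 := by
      u_frame p3
    have z0 : v.mem.readLE (e.reg .rsp - 1444) 4 = 0 := by
      have h1 := hmid.consts.z24 (by omega) (by omega)
      have h2 := addr_sub_lit (e.reg .rsp).toNat 1444 (by omega)
      rw [addr_toNat] at h2
      have e1 : g.R + 0x24 = (e.reg .rsp).toNat - 1444 := by
        rw [hR]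
        omega
      rw [e1] at h1
      rw [h2]
      exact h1
    have p4 : sb.mem.readLE (e.reg .rsp - 1444) 4 = 0 := by
      rw [hsbm]
      u_read
    rw [hsbm] at p4
    have zr : sr.mem.readLE (e.reg .rsp - 1444) 4 = 0 := by
      u_frame p4
    clear p1 p2 p3 p4
    -- the live set after the allocation
    have hL1 : BlkLive (g.Blk A) (Asan.Live (stackObjs g.frames' ++ (A.1.newSetupObj n :: A.2))) :=
      hL.mono (live_cons g.frames' _ A.2)
    have hLa1 : BlkLive A.1.Blk (Asan.Live (stackObjs g.frames' ++ (A.1.newSetupObj n :: A.2))) :=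
      hLa.mono (live_cons g.frames' _ A.2)
    u_walk hcode [hμ.vendor] until [Vorbis.L.start_decoder.cut265, Vorbis.L.start_decoder.cut4] span [Vorbis.L.textLo, Vorbis.L.textHi] side (v_side)
    case check_115d47 =>
      -- 0x115d47, C line 4076: store8 `r->classdata`
      have hun : ShadowUntouched sr.mem s_115d47.mem := by v_untouched
      have hs : Site (Asan.Live (stackObjs g.frames' ++ (A.1.newSetupObj n :: A.2))) (r + 16) 8 := by
        apply hres.upTo.site_record hLa1 hlt 16 8 (by simp only [voff]; omega) (by omega)
        rw [← hr]
        rfl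
      exact Vorbis.Spec.check_site hshadow1 hun hs (by u_omega)
    case check_115d6e =>
      -- 0x115d6e, C line 4078: load8 `f->codebooks`
      have hun : ShadowUntouched sr.mem s_115d6e.mem := by v_untouched
      have hs : Site (Asan.Live (stackObjs g.frames' ++ (A.1.newSetupObj n :: A.2))) (g.f + 168) 8 :=
        hmid.bits.site_field hL1 168 8 (by omega) (by omega) rfl
      exact Vorbis.Spec.check_site hshadow1 hun hs (by u_omega)
    case check_115d7e =>
      -- 0x115d7e, C line 4078: load1 `r->classbook`
      have hun : ShadowUntouched sr.mem s_115d7e.mem := by v_untouched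
      have hs : Site (Asan.Live (stackObjs g.frames' ++ (A.1.newSetupObj n :: A.2))) (r + 13) 1 := by
        apply hres.upTo.site_record hLa1 hlt 13 1 (by simp only [voff]; omega) (by omega)
        rw [← hr]
        rfl
      exact Vorbis.Spec.check_site hshadow1 hun hs (by u_omega)
    case check_115d95 =>
      -- 0x115d95, C line 4078: load4 `cbk->entries`
      have hun : ShadowUntouched sr.mem s_115d95.mem := by v_untouched
      have hs : Site (Asan.Live (stackObjs g.frames' ++ (A.1.newSetupObj n :: A.2))) (cbs + 2120 * cb + 4) 4 := by
        apply Site.of_blk hLa1 hF2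
        · simp only []
          omega
        · simp only [voff]
          omega
        · omega
      exact Vorbis.Spec.check_site hshadow1 hun hs (by u_omega)
    case call_inv =>
      v_inv
    case pre_115daa =>
      -- 0x115daa: `memset(r->classdata, 0, 8·E)`: the new block is ONE live object
      have hun : ShadowUntouched sr.mem s_115daa.mem := by v_untouched
      have hrsp : (s_115daa.reg .rsp).toNat + 8 = g.R := by
        rw [w_rsp, hR]
        u_omega
      have hrdx : (s_115daa.reg .rdx).toNat = n := by
        rw [w_rdx, rdx_val E32 hE, hn8]
      refine ⟨⟨?_, ?_⟩, Or.inr ?_⟩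
      · rw [hrsp]
        exact hshadow1.untouched hun
      · intro o ho
        rcases List.mem_cons.mp ho with rfl | h2
        · show Vorbis.L.textHi ≤ A.1.B + (A.1.S + 32)
          have e1 : Vorbis.L.textHi = 0x119d40 := rfl
          omega
        · exact hframe.offText o h2
      · rw [hrdx, w_rdi, hpa]
        refine ⟨A.1.newSetupObj n, List.mem_append_right _ List.mem_cons_self, ?_, ?_⟩
        · show A.1.B + (A.1.S + 32) ≤ p
          omega
        · show p + n ≤ A.1.B + (A.1.S + 32) + n
          omega
    -- 0x115daf: after `memset` returned
    v_after_call w_rsp_115daa w_mem_115daa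
    have hrdx : (s_115daa.reg .rdx).toNat = n := by
      rw [w_rdx_115daa, rdx_val E32 hE, hn8]
    simp only [w_rdi_115daa, hpa] at w_same
    rw [hrdx] at w_same
    have ze : s_115daa.mem.readLE (e.reg .rsp - 1444) 4 = 0 := by
      rw [w_mem_115daa]
      u_read
    rw [w_mem_115daa, hpa] at ze
    have zz : s_115daar.mem.readLE (e.reg .rsp - 1444) 4 = 0 := by
      u_frame ze
    obtain ⟨hraxm, hunm, hzerom⟩ := w_post
    have hunsm : ShadowUntouched sr.mem s_115daar.mem := by
      have h1 : ShadowUntouched sr.mem s_115daa.mem := by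
        rw [w_mem_115daa]
        v_untouched
      exact Mem.EqOn.trans h1 hunm
    u_walk hcode [hμ.vendor] until [Vorbis.L.start_decoder.cut265, Vorbis.L.start_decoder.cut4] span [Vorbis.L.textLo, Vorbis.L.textHi] side (v_side)
    -- 0x115db9 (cut265): the exit to R7
    refine ReachVia.done (Or.inl ?_)
    exact hexitS n p s_115daar s_115db4 hn hn8 hE hfit hp harena1 hshadow1 hsame1 w_same hunsm w_df w_mx zz
      w_rip w_r13 w_rsp w_rbp w_kept w_mem w_eq w_flags w_mxcsr
  · -- the allocation FAILED: rax = 0, the arena and the shadow as they were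
    obtain ⟨w_rax, harena1, hun1, hfail⟩ := hpost.2 hfit
    have hunr : ShadowUntouched v.mem sr.mem := Mem.EqOn.trans hunb hun1
    -- the failure clause of the callee's post: only its stack and `[f + 8, f + 12)` were written (no shadow byte)
    rw [hsp, hsbm] at hfail
    u_walk hcode [hμ.vendor] until [Vorbis.L.start_decoder.cut265, Vorbis.L.start_decoder.cut4] span [Vorbis.L.textLo, Vorbis.L.textHi] side (v_side)
    case check_115d47 =>
      -- 0x115d47, C line 4076: store8 `r->classdata` (R2, i < residue_count)
      have hun : ShadowUntouched sr.mem s_115d47.mem := by v_untouched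
      have hs : Site (g.Live A) (r + 16) 8 := by
        apply hres.upTo.site_record hLa hlt 16 8 (by simp only [voff]; omega) (by omega)
        rw [← hr]
        rfl
      exact Vorbis.Spec.check_site hframe.shadow (Mem.EqOn.trans hunr hun) hs (by u_omega)
    case call_inv =>
      v_inv
    case pre_115d5d =>
      -- 0x115d5d: `error(f, VORBIS_outofmem)`
      have hun : ShadowUntouched sr.mem s_115d5d.mem := by v_untouched
      have hrsp : (s_115d5d.reg .rsp).toNat + 8 = g.R := by
        rw [w_rsp, hR]
        u_omega
      refine ⟨⟨?_, hframe.offText⟩, ?_⟩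
      · rw [hrsp]
        exact hframe.shadow.untouched (Mem.EqOn.trans hunr hun)
      · rw [w_rdi, hfa]
        exact hhand.obj.mono (frames_sub g A.2)
    -- 0x115d62: after `error` returned: `jmp 113b22`
    v_after_call w_rsp_115d5d w_mem_115d5d
    simp only [w_rdi_115d5d, voff] at w_same
    obtain ⟨hrax, hune, herrv⟩ := w_post
    have w_rax : s_115d5dr.reg .rax = 0 := hrax
    have hunse : ShadowUntouched sr.mem s_115d5dr.mem := by
      have h1 : ShadowUntouched sr.mem s_115d5d.mem := by
        rw [w_mem_115d5d]
        v_untouched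
      exact Mem.EqOn.trans h1 hune
    u_walk hcode [hμ.vendor] until [Vorbis.L.start_decoder.cut265, Vorbis.L.start_decoder.cut4] span [Vorbis.L.textLo, Vorbis.L.textHi] side (v_side)
    -- 0x113b22 (cut4): the exit to the epilogue
    refine ReachVia.done (Or.inr ?_)
    exact hexitE n s_115d5dr s_115d62 hn hfit harena1 hunr hfail w_same hunse w_df w_mx
      w_rip w_rsp w_rax w_kept w_mem w_eq w_flags w_mxcsr

/-! ### Towards the exit `AtR7`: the combined footprint, and a frame toolkit for the residue section -/

/-- The success exit, step 1: what changed between the segment's entry memory and its exit memory, as ONE literal footprint. -/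
theorem exit_R7_same (Lay : Layout) (hLay : Lay.hi = 0x1000000) (u₀ : State)
    (g : Ghost) (i : Nat) (v : State) (A6 A6c Ai : Arena) (A : Arena × List Obj) (hb : BodyR6 u₀ g i A6 A6c Ai A v)
    (e : State) (r cbs cb E32 : Nat) (sr : State)
    (hge : g.e = e) (hr : resAt g v.mem i = r) (hcbs : stb_vorbis.codebooks v.mem g.f = cbs)
    (hcb : Residue.classbook v.mem r = cb)
    (n p : Nat) (sm s : State)
    (hn8 : n = 8 * E32) (hE : E32 < 2 ^ 24)
    (hfit : A.1.Fits n) (hp : A.1.B + A.1.S + 32 = p)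
    (harena1 : ArenaOK (A.1.pushSetup n) (A.1.newSetupObj n :: A.2) sr.mem g.f)
    (hsame1 : Mem.SameExcept
        [{ lo := (e.reg .rsp - 1488).toNat - 80, hi := (e.reg .rsp - 1488).toNat },
          { lo := (addr g.f).toNat + 8, hi := (addr g.f).toNat + 12 },
          { lo := (addr g.f).toNat + 128, hi := (addr g.f).toNat + 132 },
          { lo := 12582912 + (A.1.B + A.1.S + 32) / 8, hi := 12582912 + (A.1.B + A.1.S + 32 + n + 7) / 8 }]
        (v.mem.writeLE (e.reg .rsp - 1488) 8 1137984) sr.mem)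
    (hsame2 : Mem.SameExcept
        [{ lo := (e.reg .rsp - 1488).toNat - 64, hi := (e.reg .rsp - 1488).toNat }, { lo := p, hi := p + n }]
        (((sr.mem.writeLE (e.reg .rsp - 1488) 8 1137996).writeLE (addr r + 16) 8 p).writeLE (e.reg .rsp - 1488) 8
          1138095) sm.mem)
    (w_mem : s.mem = sm.mem.writeLE (e.reg .rsp - 1424) 4 (Word.part Width.w32 (addr i)).toNat) :
    Mem.SameExcept
      [{ lo := (e.reg .rsp).toNat - 1568, hi := (e.reg .rsp).toNat - 1480 },
        { lo := (e.reg .rsp).toNat - 1424, hi := (e.reg .rsp).toNat - 1420 },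
        { lo := g.f + 8, hi := g.f + 12 }, { lo := g.f + 128, hi := g.f + 132 },
        { lo := r + 16, hi := r + 24 }, { lo := p, hi := p + n },
        { lo := 12582912 + p / 8, hi := 12582912 + (p + n + 7) / 8 }] v.mem s.mem ∧
    Mem.SameExcept
      [{ lo := (e.reg .rsp).toNat - 1568, hi := (e.reg .rsp).toNat - 1480 },
        { lo := (e.reg .rsp).toNat - 1424, hi := (e.reg .rsp).toNat - 1420 },
        { lo := r + 16, hi := r + 24 }, { lo := p, hi := p + n }] sr.mem s.mem := by
  obtain ⟨hloop, hr13, hr14, hrbx, hcur⟩ := hb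
  obtain ⟨hframe, hhand, hmid, hile, hres, hzero⟩ := hloop
  have he : AtEntry (conv u₀) Vorbis.L.start_decoder.entry depth g.ret e := by
    rw [← hge]
    exact hframe.entry
  v_entry he
  simp only [depth] at he_room he_stack
  have hRA : g.RA = (e.reg .rsp).toNat := by
    unfold Ghost.RA
    rw [hge]
  have hR : g.R = (e.reg .rsp).toNat - 1480 := by
    unfold Ghost.R steady
    rw [hRA]
  have v_r13 := hr13
  have v_r14 := hr14
  have v_rbx : v.reg .rbx = addr r := by
    rw [← hr]
    exact hrbx
  clear hrbx
  -- where the objects are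
  have hfw := obj_where hframe hhand
  rw [hRA] at hfw
  have hout := hhand.objOut
  simp only [voff] at hout
  have hatext : 0x119d40 ≤ A.1.B := hhand.arenaText
  have hb := hmid.arena.bounds
  have hL : BlkLive (g.Blk A) (g.Live A) := hmid.env.live
  have hLa : BlkLive A.1.Blk (g.Live A) := hL.sub (fun B hB => runBlk_setup hB)
  have hlt := hcur.lt
  have hR1 := hres.R1
  have hR2 : A.1.Blk ⟨stb_vorbis.residue_config v.mem g.f, Off.sizeof.Residue * (stb_vorbis.residue_count v.mem g.f).toNat⟩ :=
    hres.upTo.R2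
  have hrw : 0x119d40 ≤ r ∧ r + 32 ≤ 0xC00000 ∧ (r + 32 ≤ 0x700000 ∨ 0x800000 ≤ r) ∧ A.1.B ≤ r ∧ r + 32 ≤ A.1.B + A.1.S := by
    have h1 := hmid.arena.block_off hR2
    have h2 := hmid.arena.block_range hR2
    have h3 := le_r8 (Off.sizeof.Residue * (stb_vorbis.residue_count v.mem g.f).toNat)
    rw [← hr]
    simp only [resAt, stb_vorbis.residue_config_at, voff] at h1 h2 h3 ⊢
    omega
  have hcb_lt : cb < 256 := by
    rw [← hcb]
    simp only [vacc, voff]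
    exact Mem.u8_lt _ _
  have hR7 : (cb : Int) < stb_vorbis.codebook_count v.mem g.f := by
    have := hcur.R7
    rw [hr, hcb] at this
    exact this
  have hcbok := (hmid.own.cb0 (by omega)).ok (hmid.own.nonnull (by omega))
  have hF1 := hcbok.F1
  have hF2 : A.1.Blk ⟨cbs, Off.sizeof.Codebook * (stb_vorbis.codebook_count v.mem g.f).toNat⟩ := by
    rw [← hcbs]
    exact hcbok.F2.mono hmid.extc
  have hcw : 0x100000 ≤ cbs + 2120 * cb ∧ cbs + 2120 * cb + 2120 ≤ 0xC00000 ∧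
      (cbs + 2120 * cb + 2120 ≤ 0x700000 ∨ 0x800000 ≤ cbs + 2120 * cb) ∧
      A.1.B ≤ cbs + 2120 * cb ∧ cbs + 2120 * cb + 2120 ≤ A.1.B + A.1.S := by
    have h1 := hmid.arena.block_off hF2
    have h2 := hmid.arena.block_range hF2
    have h3 := le_r8 (Off.sizeof.Codebook * (stb_vorbis.codebook_count v.mem g.f).toNat)
    simp only [voff] at h1 h2 h3
    omega
  have hcr : cbs + 2120 * cb + 2120 ≤ r ∨ r + 32 ≤ cbs + 2120 * cb := by
    have hd := hmid.arena.old_disjoint_since hmid.extc hcbok.F2 (hres.R2.mono (hres.ext6c.trans hres.exti))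
    rw [hcbs] at hd
    rw [← hr]
    simp only [vblock, resAt, stb_vorbis.residue_config_at, voff] at hd ⊢
    omega
  have ld1 : v.mem.readLE (addr g.f + 168) 8 = cbs := by
    rw [← hcbs]
    simp only [vfield, vacc, voff]
  have ld2 : v.mem.readLE (addr r + 13) 1 = cb := by
    rw [← hcb]
    simp only [vfield, vacc, voff]
  have hfa : (addr g.f).toNat = g.f := toNat_addr _ (by omega)
  have hra : (addr r).toNat = r := toNat_addr _ (by omega)
  have hca : (UInt64.ofNat cbs).toNat = cbs := toNat_addr _ (by omega)
  have hza : (Word.ofBV (BitVec.setWidth 64 (BitVec.zeroExtend 32 (BitVec.ofNat 8 cb)))).toNat = cb := by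
    rw [zx8 cb hcb_lt]
    exact toNat_addr _ (by omega)

  rw [hp] at hsame1
  have hnewblk : (A.1.pushSetup n).Blk ⟨p, n⟩ := by
    rw [← hp]
    exact A.1.blk_pushSetup n
  have hpw : 0x119d40 ≤ p ∧ p + n ≤ 0xC00000 ∧ (p + n ≤ 0x700000 ∨ 0x800000 ≤ p) ∧ A.1.B + A.1.S + 32 = p ∧
      p + n ≤ A.1.B + A.1.L := by
    have h1 := harena1.block_off hnewblk
    have h2 := arena_inside harena1 hnewblk
    simp only [varena] at h2
    simp only [] at h1 h2
    omega
  have hsp8 : (e.reg .rsp - 1488).toNat = (e.reg .rsp).toNat - 1488 := by u_omega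
  have hsp4 : (e.reg .rsp - 1424).toNat = (e.reg .rsp).toNat - 1424 := by u_omega
  rw [hsp8, hfa] at hsame1
  rw [hsp8] at hsame2
  constructor
  · rw [w_mem]
    u_same
  · rw [w_mem]
    u_same

/-- **Where things are inside start_decoder**, as arithmetic (memory-independent): `*f` (a caller's stack object or off the stack,
outside the arena), the steady stack pointer, the arena (in the data space, off the stack region). -/
structure Pos (g : Ghost) (A : Arena) : Prop where
  f_lo : 0x119d40 ≤ g.f
  f_hi : g.f + 1808 ≤ 0xC00000
  f_stack : g.RA + 8 ≤ g.f ∨ g.f + 1808 ≤ 0x700000 ∨ 0x800000 ≤ g.f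
  f_out : g.f + 1808 ≤ A.B ∨ A.B + A.L ≤ g.f
  r_eq : g.R + 1480 = g.RA
  ra_lo : 0x700000 + 1888 ≤ g.RA
  ra_hi : g.RA + 8 ≤ 0x800000
  a_lo : 0x119d40 ≤ A.B
  a_s : A.S ≤ A.L
  a_hi : A.B + A.L ≤ 0xC00000
  a_stack : A.B + A.L ≤ 0x700000 ∨ 0x800000 ≤ A.B

/-- `Pos` at a cut point: from `Frame`, `Hand` and the arena layer. -/
theorem pos_of {u₀ : State} {g : Ghost} {pc : Word} {A : Arena × List Obj} {v : State} {mem : Mem}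
    (hf : Frame u₀ g pc A v) (hh : g.Hand A) (ha : ArenaOK A.1 A.2 mem g.f) : Pos g A.1 := by
  have h1 := obj_where hf hh
  have h2 := hh.objOut
  simp only [voff] at h2
  have h3 := hf.r_eq
  have h4 := hf.ra
  simp only [steady, depth] at h3 h4
  have h5 := ha.bounds
  have h6 := ha.AR1x
  have h7 : 0x119d40 ≤ A.1.B := hh.arenaText
  exact ⟨h1.1, h1.2.1, h1.2.2, h2, h3.1, h4.2.1, h4.2.2, h7, by omega, h5.2.2.2, h6.2⟩

/-- **A window that a segment of the residue section may write without touching what its invariant reads**: start_decoder's own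
stack below the steady stack pointer `R` (pushed return addresses, the callees' frames); the spill slots `[R+2CH, R+50H)`; the
allocator's and `error`'s fields of `*f` (`[8,12)`, `[128,144)`); the field `classdata` of the record `r` under construction; the
free part of the arena (a block allocated by this segment); the shadow. -/
def OffOld (g : Ghost) (A : Arena) (r : Nat) (w : Span) : Prop :=
  (0x700000 ≤ w.lo ∧ w.hi ≤ g.R) ∨ (g.R + 0x2c ≤ w.lo ∧ w.hi ≤ g.R + 0x50) ∨ (g.f + 8 ≤ w.lo ∧ w.hi ≤ g.f + 12) ∨
    (g.f + 128 ≤ w.lo ∧ w.hi ≤ g.f + 144) ∨ (r + 16 ≤ w.lo ∧ w.hi ≤ r + 24) ∨ (A.B + A.S ≤ w.lo ∧ w.hi ≤ A.B + A.L) ∨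
    0xC00000 ≤ w.lo

/-- **Everything inside the used part of the arena, off the field `r->classdata`, is kept** by a footprint of `OffOld` windows. -/
theorem kept_region {g : Ghost} {A : Arena} {r : Nat} {mem mem' : Mem} {ws : List Span} (hp : Pos g A)
    (hs : Mem.SameExcept ws mem mem') (hws : ∀ w, w ∈ ws → OffOld g A r w) (C : Block) (h1 : A.B ≤ C.base)
    (h2 : C.base + C.size ≤ A.B + A.S) (h3 : C.base + C.size ≤ r + 16 ∨ r + 24 ≤ C.base) : C.Kept mem mem' := by
  obtain ⟨p1, p2, p3, p4, p5, p6, p7, p8, p9, p10, p11⟩ := hp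
  apply Block.Kept.of_sameExcept hs
  · intro w hw
    have := hws w hw
    unfold OffOld at this
    omega
  · omega

/-- **The windows of `*f` off the allocator's and `error`'s fields read the same** under a footprint of `OffOld` windows. -/
theorem objEq_off {g : Ghost} {A : Arena} {r : Nat} {mem mem' : Mem} {ws : List Span} (hp : Pos g A)
    (hr : A.B ≤ r ∧ r + 32 ≤ A.B + A.L)
    (hs : Mem.SameExcept ws mem mem') (hws : ∀ w, w ∈ ws → OffOld g A r w) (wins : Wins)
    (hw : ∀ w, w ∈ wins → (w.2 ≤ 8 ∨ 12 ≤ w.1) ∧ (w.2 ≤ 128 ∨ 144 ≤ w.1) ∧ w.2 ≤ 1808) :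
    ObjEq wins mem g.f mem' g.f := by
  obtain ⟨p1, p2, p3, p4, p5, p6, p7, p8, p9, p10, p11⟩ := hp
  apply ObjEq.of_sameExcept hs
  · intro w hw'
    have := hw w hw'
    omega
  · intro w hw' sp hsp
    have h1 := hw w hw'
    have h2 := hws sp hsp
    unfold OffOld at h2
    omega

/-- An `EqOn` of a range of start_decoder's frame above the spill slots / of `*f` etc.: any range that meets no `OffOld` window. -/
theorem eqOn_off {g : Ghost} {A : Arena} {r : Nat} {mem mem' : Mem} {ws : List Span}
    (hs : Mem.SameExcept ws mem mem') (hws : ∀ w, w ∈ ws → OffOld g A r w) (lo hi : Nat)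
    (hd : ∀ w, OffOld g A r w → hi ≤ w.lo ∨ w.hi ≤ lo) : Mem.EqOn lo hi mem mem' :=
  hs.eqOn lo hi (fun w hw => hd w (hws w hw))

/-- **THE POINT `Mid` AT THE EXIT OF AN ALLOCATING SEGMENT OF THE RESIDUE SECTION**: from `Mid` at the entry memory, a footprint of
`OffOld` windows between the two memories, and the allocator's post carried to the exit memory (`harena'`, `hshadow'`). -/
theorem mid_after {u₀ : State} {g : Ghost} {pc : Word} {v : State} {A6 A6c Ai : Arena} {A : Arena × List Obj} {mem' : Mem}
    {i r n : Nat} {ws : List Span}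
    (hf : Frame u₀ g pc A v) (hh : g.Hand A) (hmid : Mid g 6 6 7 A6 A v.mem) (hres : ResTrans A6 A6c Ai A.1 v.mem g.f i)
    (hlt : (i : Int) < stb_vorbis.residue_count v.mem g.f) (hr : stb_vorbis.residue_config_at v.mem g.f i = r)
    (hs : Mem.SameExcept ws v.mem mem') (hws : ∀ w, w ∈ ws → OffOld g A.1 r w)
    (harena' : ArenaOK (A.1.pushSetup n) (A.1.newSetupObj n :: A.2) mem' g.f)
    (hshadow' : ShadowInv (A.1.newSetupObj n :: A.2) g.frames' g.R mem') :
    Mid g 6 6 7 A6 (A.1.pushSetup n, A.1.newSetupObj n :: A.2) mem' := by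
  have hp := pos_of hf hh hmid.arena
  have hR1 := hres.R1
  have hR2 : A.1.Blk ⟨stb_vorbis.residue_config v.mem g.f, Off.sizeof.Residue * (stb_vorbis.residue_count v.mem g.f).toNat⟩ :=
    hres.upTo.R2
  have hcin := arena_inside hmid.arena hR2
  have hcrg := hmid.arena.block_range hR2
  have hcl := le_r8 (Off.sizeof.Residue * (stb_vorbis.residue_count v.mem g.f).toNat)
  have hrpos : A.1.B ≤ r ∧ r + 32 ≤ A.1.B + A.1.L ∧ stb_vorbis.residue_config v.mem g.f ≤ r ∧
      r + 32 ≤ stb_vorbis.residue_config v.mem g.f + 32 * (stb_vorbis.residue_count v.mem g.f).toNat := by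
    rw [← hr]
    have := hp.a_s
    simp only [stb_vorbis.residue_config_at, voff] at hcin hcrg hcl ⊢
    omega
  apply mid_alloc hmid
  · -- the windows of `*f`
    apply objEq_off hp ⟨hrpos.1, hrpos.2.1⟩ hs hws
    intro w hw
    have e1 : Mid.hi 6 = 320 := by decide
    have e2 : restFrom 7 = 464 := by decide
    simp only [Mid.winsAt, e1, e2, List.mem_cons, List.mem_nil_iff, or_false] at hw
    rcases hw with rfl | rfl | rfl | rfl | rfl | rfl <;> simp only [] <;> omega
  · -- every block of the configuration arena is older than `residue_config`
    intro B hB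
    have hBA : A.1.Blk B := hB.mono hmid.extc
    have hin := arena_inside hmid.arena hBA
    have hrg := hmid.arena.block_range hBA
    have hl := le_r8 B.size
    have hd := hmid.arena.old_disjoint_since hmid.extc hB (hres.R2.mono (hres.ext6c.trans hres.exti))
    simp only [vblock, voff] at hd
    apply kept_region hp hs hws B hin.1 (by omega)
    omega
  · -- the frame constants
    have hpR := hp.r_eq
    have hpa := hp.ra_hi
    apply SDFrameConsts.frame hmid.consts _ (by omega)
    apply eqOn_off hs hws
    intro w hw
    obtain ⟨p1, p2, p3, p4, p5, p6, p7, p8, p9, p10, p11⟩ := hp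
    unfold OffOld at hw
    omega
  · -- the slot of longest_floorlist
    intro _ _
    have hpR := hp.r_eq
    have hpa := hp.ra_hi
    have he : Mem.EqOn (g.R + 0x28) (g.R + 0x2c) v.mem mem' := by
      apply eqOn_off hs hws
      intro w hw
      obtain ⟨p1, p2, p3, p4, p5, p6, p7, p8, p9, p10, p11⟩ := hp
      unfold OffOld at hw
      omega
    simp only [Mem.i32_def]
    rw [he.u32 (g.R + 0x28) (by omega) (by omega) (by omega)]
  · exact A.1.extends_pushSetup n
  · -- the environment of the check sites for the grown arena
    refine ⟨hshadow'.covers, ?_, ?_⟩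
    · apply harena'.runBlk_ok (hmid.env.ok.sub (fun _ hB => runBlk_extra hB))
      intro C hC
      show C.base + C.size ≤ A.1.B ∨ A.1.B + A.1.L ≤ C.base
      rcases List.mem_cons.mp hC with rfl | hm
      · exact hh.objOut
      · exact hh.outside C hm
    · apply harena'.runBlk_live (fun o ho => List.mem_append_right _ ho)
      exact (hmid.env.live.sub (fun _ hB => runBlk_extra hB)).mono (live_cons g.frames' _ A.2)
  · exact harena'
  · exact hmid.noTemps
  · -- `Bits`
    obtain ⟨p1, p2, p3, p4, p5, p6, p7, p8, p9, p10, p11⟩ := hp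
    have hsf : Bits.SameFields v.mem mem' g.f := by
      apply Bits.SameFields.of_sameExcept hs
      all_goals
        intro w hw
        have := hws w hw
        unfold OffOld at this
        omega
    apply (hmid.bits.frame_fields hsf).reblk
    · exact runBlk_mono (A.1.extends_pushSetup n) (fun _ h => h) _ hmid.bits.OB1
    · exact runBlk_mono (A.1.extends_pushSetup n) (fun _ h => h) _ hmid.bits.S2



/-- **RES(i) WITH ITS AGES over a footprint of `OffOld` windows** (the allocator call, the store `r->classdata = …` into record `i`,
the memset of the new block, the spills): the finished records, their class books' headers and their blocks are kept. -/
theorem res_after {u₀ : State} {g : Ghost} {pc : Word} {v : State} {A6 A6c Ai : Arena} {A : Arena × List Obj} {mem' : Mem}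
    {i r : Nat} {ws : List Span}
    (hf : Frame u₀ g pc A v) (hh : g.Hand A) (hmid : Mid g 6 6 7 A6 A v.mem) (hres : ResTrans A6 A6c Ai A.1 v.mem g.f i)
    (hlt : (i : Int) < stb_vorbis.residue_count v.mem g.f) (hr : stb_vorbis.residue_config_at v.mem g.f i = r)
    (hs : Mem.SameExcept ws v.mem mem') (hws : ∀ w, w ∈ ws → OffOld g A.1 r w) :
    ResTrans A6 A6c Ai A.1 mem' g.f i := by
  have hp := pos_of hf hh hmid.arena
  have hR1 := hres.R1
  have hR2 : A.1.Blk ⟨stb_vorbis.residue_config v.mem g.f, Off.sizeof.Residue * (stb_vorbis.residue_count v.mem g.f).toNat⟩ :=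
    hres.upTo.R2
  have hcin := arena_inside hmid.arena hR2
  have hcrg := hmid.arena.block_range hR2
  have hcl := le_r8 (Off.sizeof.Residue * (stb_vorbis.residue_count v.mem g.f).toNat)
  have hreq : stb_vorbis.residue_config v.mem g.f + 32 * i = r := by
    rw [← hr]
    simp only [stb_vorbis.residue_config_at, voff]
  simp only [voff] at hcin hcrg hcl
  have hrpos : A.1.B ≤ r ∧ r + 32 ≤ A.1.B + A.1.L := by
    have := hp.a_s
    omega
  -- a block of the arena that is not the `residue_config` block
  have hother : ∀ B, A.1.Blk B →
      B.disjoint ⟨stb_vorbis.residue_config v.mem g.f, Off.sizeof.Residue * (stb_vorbis.residue_count v.mem g.f).toNat⟩ →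
      B.Kept v.mem mem' := by
    intro B hBA hd
    have hin := arena_inside hmid.arena hBA
    have hrg := hmid.arena.block_range hBA
    have hl := le_r8 B.size
    simp only [vblock, voff] at hd
    apply kept_region hp hs hws B hin.1 (by omega)
    omega
  apply resTrans_frame hres
  · apply objEq_off hp hrpos hs hws
    intro w hw
    simp only [ResidueUpTo.wins, List.mem_cons, List.mem_nil_iff, or_false] at hw
    rcases hw with rfl | rfl | rfl <;> simp only [] <;> omega
  · -- the finished records: 32 bytes each, below record `i`
    intro k hk
    apply kept_region hp hs hws
    · simp only [stb_vorbis.residue_config_at, voff]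
      omega
    · simp only [stb_vorbis.residue_config_at, voff]
      omega
    · simp only [stb_vorbis.residue_config_at, voff]
      omega
  · -- the codebooks block: a block of the configuration arena
    have hcbok := (hmid.own.cb0 (by omega)).ok (hmid.own.nonnull (by omega))
    apply hother _ (hcbok.F2.mono hmid.extc)
    exact hmid.arena.old_disjoint_since hmid.extc hcbok.F2 (hres.R2.mono (hres.ext6c.trans hres.exti))
  · -- the blocks of the finished records: allocated after `residue_config`
    intro k hk B hO
    have hrk := hres.record k hk
    have hS : Since A6c Ai B := by
      cases hO with
      | books => exact hrk.R8
      | classdata => exact hrk.R8a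
      | row q hq => exact hrk.R8a_row q hq
    apply hother B (hS.1.mono hres.exti)
    have hd := hmid.arena.old_disjoint_since (hres.ext6c.trans hres.exti) hres.R2.1 (hS.mono hres.exti)
    simp only [vblock] at hd ⊢
    omega

/-- **The untouched records stay zero**: `classdata = NULL` in the records from `i + 1` on. -/
theorem zero_after {u₀ : State} {g : Ghost} {pc : Word} {v : State} {A6 A6c Ai : Arena} {A : Arena × List Obj} {mem' : Mem}
    {i r : Nat} {ws : List Span}
    (hf : Frame u₀ g pc A v) (hh : g.Hand A) (hmid : Mid g 6 6 7 A6 A v.mem) (hres : ResTrans A6 A6c Ai A.1 v.mem g.f i)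
    (hzero : ResidueZeroFrom v.mem g.f i)
    (hlt : (i : Int) < stb_vorbis.residue_count v.mem g.f) (hr : stb_vorbis.residue_config_at v.mem g.f i = r)
    (hs : Mem.SameExcept ws v.mem mem') (hws : ∀ w, w ∈ ws → OffOld g A.1 r w) :
    ResidueZeroFrom mem' g.f (i + 1) := by
  have hp := pos_of hf hh hmid.arena
  have hR1 := hres.R1
  have hR2 : A.1.Blk ⟨stb_vorbis.residue_config v.mem g.f, Off.sizeof.Residue * (stb_vorbis.residue_count v.mem g.f).toNat⟩ :=
    hres.upTo.R2
  have hcin := arena_inside hmid.arena hR2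
  have hcrg := hmid.arena.block_range hR2
  have hcl := le_r8 (Off.sizeof.Residue * (stb_vorbis.residue_count v.mem g.f).toNat)
  have hreq : stb_vorbis.residue_config v.mem g.f + 32 * i = r := by
    rw [← hr]
    simp only [stb_vorbis.residue_config_at, voff]
  simp only [voff] at hcin hcrg hcl
  have hrpos : A.1.B ≤ r ∧ r + 32 ≤ A.1.B + A.1.L := by
    have := hp.a_s
    omega
  have he : ObjEq ResidueOK.wins v.mem g.f mem' g.f := by
    apply objEq_off hp hrpos hs hws
    intro w hw
    simp only [ResidueOK.wins, List.mem_cons, List.mem_nil_iff, or_false] at hw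
    rcases hw with rfl | rfl <;> simp only [] <;> omega
  have ecount : stb_vorbis.residue_count mem' g.f = stb_vorbis.residue_count v.mem g.f := by
    simp only [vacc, voff]
    exact he.i32 320 (by decide)
  have econf : stb_vorbis.residue_config mem' g.f = stb_vorbis.residue_config v.mem g.f := by
    simp only [vacc, voff]
    exact he.u64 456 (by decide)
  intro k hk hklt
  rw [ecount] at hklt
  have hz := hzero k (by omega) hklt
  have eat : stb_vorbis.residue_config_at mem' g.f k = stb_vorbis.residue_config_at v.mem g.f k := by
    unfold stb_vorbis.residue_config_at
    rw [econf]
  rw [eat]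
  have hkept : (Block.mk (stb_vorbis.residue_config_at v.mem g.f k) Off.sizeof.Residue).Kept v.mem mem' := by
    apply kept_region hp hs hws
    · simp only [stb_vorbis.residue_config_at, voff]
      omega
    · simp only [stb_vorbis.residue_config_at, voff]
      omega
    · simp only [stb_vorbis.residue_config_at, voff]
      omega
  simp only [Residue.classdata, Mem.ptr_eq, voff] at hz ⊢
  rw [hkept.u64 _ (by simp only []; omega) (by simp only [voff]; omega)]
  exact hz


/-- **The record under construction at the exit of R6** (stage 6 → stage 7): its fields but `classdata`, its class book's header
and its `residue_books` block are kept by a footprint of `OffOld` windows; `classdata` now holds the block `setup_malloc` returned,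
of `n = 8·E` bytes, allocated since the arena `A.1` of before the call. -/
theorem cur_after {u₀ : State} {g : Ghost} {pc : Word} {v : State} {A6 A6c Ai : Arena} {A : Arena × List Obj} {mem' : Mem}
    {i r n : Nat} {ws : List Span}
    (hf : Frame u₀ g pc A v) (hh : g.Hand A) (hmid : Mid g 6 6 7 A6 A v.mem) (hres : ResTrans A6 A6c Ai A.1 v.mem g.f i)
    (hcur : ResCur g (Since Ai A.1) (Since Ai A.1) v.mem i 6)
    (hr : stb_vorbis.residue_config_at v.mem g.f i = r)
    (hs : Mem.SameExcept ws v.mem mem') (hws : ∀ w, w ∈ ws → OffOld g A.1 r w)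
    (h16 : mem'.u64 (r + 16) = A.1.B + (A.1.S + 32)) (hn : n = 8 * Residue.E v.mem g.f r) :
    ResCur g (Since Ai A.1) (Since A.1 (A.1.pushSetup n)) mem' i 7 := by
  have hp := pos_of hf hh hmid.arena
  have hlt := hcur.lt
  have hR1 := hres.R1
  have hR2 : A.1.Blk ⟨stb_vorbis.residue_config v.mem g.f, Off.sizeof.Residue * (stb_vorbis.residue_count v.mem g.f).toNat⟩ :=
    hres.upTo.R2
  have hcin := arena_inside hmid.arena hR2
  have hcrg := hmid.arena.block_range hR2
  have hcl := le_r8 (Off.sizeof.Residue * (stb_vorbis.residue_count v.mem g.f).toNat)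
  have hreq : stb_vorbis.residue_config v.mem g.f + 32 * i = r := by
    rw [← hr]
    simp only [stb_vorbis.residue_config_at, voff]
  simp only [voff] at hcin hcrg hcl
  have hrpos : A.1.B ≤ r ∧ r + 32 ≤ A.1.B + A.1.L := by
    have := hp.a_s
    omega
  have hother : ∀ B, A.1.Blk B →
      B.disjoint ⟨stb_vorbis.residue_config v.mem g.f, Off.sizeof.Residue * (stb_vorbis.residue_count v.mem g.f).toNat⟩ →
      B.Kept v.mem mem' := by
    intro B hBA hd
    have hin := arena_inside hmid.arena hBA
    have hrg := hmid.arena.block_range hBA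
    have hl := le_r8 B.size
    simp only [vblock, voff] at hd
    apply kept_region hp hs hws B hin.1 (by omega)
    omega
  have he : ObjEq ResidueOK.wins v.mem g.f mem' g.f := by
    apply objEq_off hp hrpos hs hws
    intro w hw
    simp only [ResidueOK.wins, List.mem_cons, List.mem_nil_iff, or_false] at hw
    rcases hw with rfl | rfl <;> simp only [] <;> omega
  have ecount : stb_vorbis.residue_count mem' g.f = stb_vorbis.residue_count v.mem g.f := by
    simp only [vacc, voff]
    exact he.i32 320 (by decide)
  have econf : stb_vorbis.residue_config mem' g.f = stb_vorbis.residue_config v.mem g.f := by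
    simp only [vacc, voff]
    exact he.u64 456 (by decide)
  have ecc : stb_vorbis.codebook_count mem' g.f = stb_vorbis.codebook_count v.mem g.f := by
    simp only [vacc, voff]
    exact he.i32 160 (by decide)
  have ecbs : stb_vorbis.codebooks mem' g.f = stb_vorbis.codebooks v.mem g.f := by
    simp only [vacc, voff]
    exact he.u64 168 (by decide)
  have eres' : resAt g mem' i = r := by
    unfold resAt stb_vorbis.residue_config_at
    rw [econf]
    exact hr
  have eres : resAt g v.mem i = r := hr
  -- the two kept parts of record `i`
  have hk1 : (Block.mk r 16).Kept v.mem mem' := by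
    apply kept_region hp hs hws
    · exact hrpos.1
    · simp only []
      omega
    · simp only []
      omega
  have hk2 : (Block.mk (r + 24) 8).Kept v.mem mem' := by
    apply kept_region hp hs hws
    · simp only []
      omega
    · simp only []
      omega
    · simp only []
      omega
  have e1 : Residue.begin mem' r = Residue.begin v.mem r := by
    simp only [vacc, voff]
    exact hk1.u32 _ (by simp only []; omega) (by simp only []; omega)
  have e2 : Residue.end_ mem' r = Residue.end_ v.mem r := by
    simp only [vacc, voff]
    exact hk1.u32 _ (by simp only []; omega) (by simp only []; omega)
  have e3 : Residue.part_size mem' r = Residue.part_size v.mem r := by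
    simp only [vacc, voff]
    exact hk1.u32 _ (by simp only []; omega) (by simp only []; omega)
  have e4 : Residue.classifications mem' r = Residue.classifications v.mem r := by
    simp only [vacc, voff]
    exact hk1.u8 _ (by simp only []; omega) (by simp only []; omega)
  have e5 : Residue.classbook mem' r = Residue.classbook v.mem r := by
    simp only [vacc, voff]
    exact hk1.u8 _ (by simp only []; omega) (by simp only []; omega)
  have e7 : Residue.residue_books mem' r = Residue.residue_books v.mem r := by
    simp only [vacc, voff]
    exact hk2.u64 _ (by simp only []; omega) (by simp only []; omega)
  have h7 := hcur.R7
  rw [eres] at h7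
  -- the class book's header
  have hcbok := (hmid.own.cb0 (by omega)).ok (hmid.own.nonnull (by omega))
  have hF1 := hcbok.F1
  have hcbk : (Block.mk (stb_vorbis.codebooks v.mem g.f)
      (Off.sizeof.Codebook * (stb_vorbis.codebook_count v.mem g.f).toNat)).Kept v.mem mem' := by
    apply hother _ (hcbok.F2.mono hmid.extc)
    exact hmid.arena.old_disjoint_since hmid.extc hcbok.F2 (hres.R2.mono (hres.ext6c.trans hres.exti))
  have e10 : Residue.cbk mem' g.f r = Residue.cbk v.mem g.f r := by
    unfold Residue.cbk stb_vorbis.codebooks_at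
    rw [e5, ecbs]
  have e11 : Residue.E mem' g.f r = Residue.E v.mem g.f r := by
    unfold Residue.E
    rw [e10]
    simp only [Codebook.entries, Residue.cbk, stb_vorbis.codebooks_at, voff]
    rw [hcbk.i32 _ (by simp only []; omega) (by simp only [voff]; omega)]
  -- the `residue_books` block
  have h8 := hcur.R8 (by omega)
  rw [eres] at h8
  have hbk : (Block.mk (Residue.residue_books v.mem r) (16 * Residue.classifications v.mem r)).Kept v.mem mem' := by
    apply hother _ h8.1
    have hd := hmid.arena.old_disjoint_since (hres.ext6c.trans hres.exti) hres.R2.1 (h8.older hres.ext6c)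
    simp only [vblock] at hd ⊢
    omega
  refine ⟨?_, ?_, ?_, ?_, ?_, ?_, ?_, ?_, ?_⟩
  · rw [ecount]
    exact hlt
  · have h3 := hcur.R3
    have e : stb_vorbis.residue_types mem' g.f i = stb_vorbis.residue_types v.mem g.f i := by
      simp only [vacc, voff]
      have hw : InWins ResidueOK.wins (324 + 2 * i) 2 := by
        apply InWins.of_mem (320, 464) (by decide)
        · show 320 ≤ 324 + 2 * i
          omega
        · show 324 + 2 * i + 2 ≤ 464
          omega
      exact he.u16_at (324 + 2 * i) hw (by omega) (by omega)
    rw [e]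
    exact h3
  · rw [eres', e1, e2]
    have := hcur.R4
    rw [eres] at this
    exact this
  · rw [eres', e3]
    have := hcur.R5
    rw [eres] at this
    exact this
  · rw [eres', e4]
    have := hcur.R6
    rw [eres] at this
    exact this
  · rw [eres', e5, ecc]
    exact h7
  · intro _
    rw [eres', e7, e4]
    exact h8
  · intro _
    rw [eres', e4]
    have h8c := hcur.R8c (by omega)
    rw [eres] at h8c
    apply h8c.keep ecc
    intro j' k' hk' hj'
    have hj : j' < Residue.classifications v.mem r := by omega
    unfold Residue.book
    rw [e7]
    exact hbk.i16 _ (by simp only []; omega) (by simp only []; omega)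
  · intro _
    rw [eres', e11, ← hn]
    have ecd : Residue.classdata mem' r = A.1.B + (A.1.S + 32) := by
      simp only [Residue.classdata, Mem.ptr_eq, voff]
      exact h16
    rw [ecd]
    exact hmid.arena.since_pushSetup n


/-- **The common part `Frame` at the exit of an allocating segment of the residue section**: the slots above the spill area, the
global `log2_4` and everything the callers see are kept by a footprint of `OffOld` windows; the shadow layer is the allocator's
post carried to the exit; `same` (the function's footprint since ITS entry) is given. -/
theorem frame_after {u₀ : State} {g : Ghost} {pc pc' : Word} {v s : State} {A6 A6c Ai : Arena} {A : Arena × List Obj}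
    {i r n : Nat} {ws : List Span}
    (hf : Frame u₀ g pc A v) (hh : g.Hand A) (hmid : Mid g 6 6 7 A6 A v.mem) (hres : ResTrans A6 A6c Ai A.1 v.mem g.f i)
    (hlt : (i : Int) < stb_vorbis.residue_count v.mem g.f) (hr : stb_vorbis.residue_config_at v.mem g.f i = r)
    (hs : Mem.SameExcept ws v.mem s.mem) (hws : ∀ w, w ∈ ws → OffOld g A.1 r w)
    (hrip : s.rip = pc') (hrsp : s.reg .rsp = addr g.R) (hcode : CodeOK u₀ s.mem) (hinv : abiInv s)
    (hshadow' : ShadowInv (A.1.newSetupObj n :: A.2) g.frames' g.R s.mem)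
    (hsame : Mem.SameExcept (footprint g) g.e.mem s.mem) :
    Frame u₀ g pc' (A.1.pushSetup n, A.1.newSetupObj n :: A.2) s := by
  have hp := pos_of hf hh hmid.arena
  have hR1 := hres.R1
  have hR2 : A.1.Blk ⟨stb_vorbis.residue_config v.mem g.f, Off.sizeof.Residue * (stb_vorbis.residue_count v.mem g.f).toNat⟩ :=
    hres.upTo.R2
  have hcin := arena_inside hmid.arena hR2
  have hreq : stb_vorbis.residue_config v.mem g.f + 32 * i = r := by
    rw [← hr]
    simp only [stb_vorbis.residue_config_at, voff]
  simp only [voff] at hcin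
  have hrpos : A.1.B ≤ r ∧ r + 32 ≤ A.1.B + A.1.L := by
    have := hp.a_s
    omega
  obtain ⟨p1, p2, p3, p4, p5, p6, p7, p8, p9, p10, p11⟩ := hp
  -- the slots of the frame above the spill area
  have hlow : Mem.EqOn (g.R + 8) (g.R + 0x10) v.mem s.mem := by
    apply eqOn_off hs hws
    intro w hw
    unfold OffOld at hw
    omega
  have hhigh : Mem.EqOn (g.R + 0x598) (g.R + 0x5d0) v.mem s.mem := by
    apply eqOn_off hs hws
    intro w hw
    unfold OffOld at hw
    omega
  -- the global `log2_4` lies off `*f` and off the arena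
  have hlogf : g.f + 1808 ≤ 0x120640 ∨ 0x120650 ≤ g.f := by
    have hob : g.Blk A (objBlock g.f) := runBlk_extra List.mem_cons_self
    have hlg : g.Blk A ⟨0x120640, 16⟩ := by
      apply runBlk_extra
      simp only [Ghost.extra, fixedBlocks, globalBlocks, List.mem_cons, true_or, or_true]
    rcases hmid.env.ok.apart _ _ hob hlg with e | hd
    · simp only [vblock, voff] at e
      have := congrArg Block.size e
      simp only [] at this
      omega
    · simp only [vblock, voff] at hd
      omega
  have hloga : 0x120640 + 16 ≤ A.1.B ∨ A.1.B + A.1.L ≤ 0x120640 := by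
    have := hh.outside ⟨0x120640, 16⟩ (by simp only [fixedBlocks, globalBlocks, List.mem_cons, true_or, or_true])
    simp only [] at this
    exact this
  have hlog : Mem.EqOn 0x120640 0x120650 v.mem s.mem := by
    apply eqOn_off hs hws
    intro w hw
    unfold OffOld at hw
    omega
  refine ⟨hf.entry, hrip, hrsp, ?_, ?_, ?_, ?_, ?_, ?_, ?_, ?_, hcode, hinv, hshadow', ?_, ?_, hf.callers, ?_, hsame⟩
  · rw [hlow.u64 (g.R + 8) (by omega) (by omega) (by omega)]
    exact hf.shadowIdx
  · rw [hhigh.u64 (g.R + 0x598) (by omega) (by omega) (by omega)]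
    exact hf.saved_rbx
  · rw [hhigh.u64 (g.R + 0x5a0) (by omega) (by omega) (by omega)]
    exact hf.saved_rbp
  · rw [hhigh.u64 (g.R + 0x5a8) (by omega) (by omega) (by omega)]
    exact hf.saved_r12
  · rw [hhigh.u64 (g.R + 0x5b0) (by omega) (by omega) (by omega)]
    exact hf.saved_r13
  · rw [hhigh.u64 (g.R + 0x5b8) (by omega) (by omega) (by omega)]
    exact hf.saved_r14
  · rw [hhigh.u64 (g.R + 0x5c0) (by omega) (by omega) (by omega)]
    exact hf.saved_r15
  · rw [hhigh.u64 (g.R + 0x5c8) (by omega) (by omega) (by omega)]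
    exact hf.saved_ra
  · intro o ho
    rcases List.mem_cons.mp ho with rfl | h2
    · show Vorbis.L.textHi ≤ A.1.B + (A.1.S + 32)
      have e1 : Vorbis.L.textHi = 0x119d40 := rfl
      omega
    · exact hf.offText o h2
  · exact hf.ext.trans (A.1.extends_pushSetup n)
  · intro k hk
    have h0 := hf.sh7 k hk
    have e : (Vorbis.Globals.log2_4.beg + k) = 0x120640 + k := rfl
    rw [e] at h0 ⊢
    have ea : (UInt64.ofNat (0x120640 + k)).toNat = 0x120640 + k := toNat_addr _ (by omega)
    rw [hlog.readLE (UInt64.ofNat (0x120640 + k)) 1 (by omega) (by omega) (by omega)]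
    exact h0



/-- A load off a store reads the memory below it. -/
theorem read_off_store (M : Mem) (a : Word) (k x : Nat) (b : Word) (m : Nat) (hk : a.toNat + k < 2 ^ 64)
    (hb : b.toNat + m < 2 ^ 64) (hd : b.toNat + m ≤ a.toNat ∨ a.toNat + k ≤ b.toNat) :
    (M.writeLE a k x).readLE b m = M.readLE b m := by
  have h := Mem.SameExcept.writeLE [⟨a.toNat, a.toNat + k⟩] M a k x hk
    ⟨_, List.mem_singleton.mpr rfl, Nat.le_refl _, Nat.le_refl _⟩
  apply h.readLE b m hb
  intro w hw
  have e := List.mem_singleton.mp hw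
  subst e
  simp only []
  omega

/-- **THE SUCCESS EXIT OF R6** (0x115db9, to R7): the hypothesis `hexitS` of `from_malloc_return`, PROVED: `BodyR7` for the grown
ghost arena `(A.1.pushSetup n, A.1.newSetupObj n :: A.2)`, `Ak = A.1`, from `BodyR6` and what the walker knows of the exit state. -/
theorem exit_R7 (Lay : Layout) (hLay : Lay.hi = 0x1000000) (u₀ : State)
    (g : Ghost) (i : Nat) (v : State) (A6 A6c Ai : Arena) (A : Arena × List Obj) (hb : BodyR6 u₀ g i A6 A6c Ai A v)
    (e : State) (r cbs cb E32 : Nat) (sr : State)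
    (hge : g.e = e) (hr : resAt g v.mem i = r) (hcbs : stb_vorbis.codebooks v.mem g.f = cbs)
    (hcb : Residue.classbook v.mem r = cb)
    (ld3 : v.mem.readLE (UInt64.ofNat cbs +
        Word.ofBV (BitVec.setWidth 64 (BitVec.zeroExtend 32 (BitVec.ofNat 8 cb))) * 2120 + 4) 4 = E32)
    (n p : Nat) (sm s : State)
    (hn8 : n = 8 * E32) (hE : E32 < 2 ^ 24)
    (hfit : A.1.Fits n) (hp : A.1.B + A.1.S + 32 = p)
    (harena1 : ArenaOK (A.1.pushSetup n) (A.1.newSetupObj n :: A.2) sr.mem g.f)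
    (hshadow1 : ShadowInv (A.1.newSetupObj n :: A.2) g.frames' g.R sr.mem)
    (hsame1 : Mem.SameExcept
        [{ lo := (e.reg .rsp - 1488).toNat - 80, hi := (e.reg .rsp - 1488).toNat },
          { lo := (addr g.f).toNat + 8, hi := (addr g.f).toNat + 12 },
          { lo := (addr g.f).toNat + 128, hi := (addr g.f).toNat + 132 },
          { lo := 12582912 + (A.1.B + A.1.S + 32) / 8, hi := 12582912 + (A.1.B + A.1.S + 32 + n + 7) / 8 }]
        (v.mem.writeLE (e.reg .rsp - 1488) 8 1137984) sr.mem)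
    (hsame2 : Mem.SameExcept
        [{ lo := (e.reg .rsp - 1488).toNat - 64, hi := (e.reg .rsp - 1488).toNat }, { lo := p, hi := p + n }]
        (((sr.mem.writeLE (e.reg .rsp - 1488) 8 1137996).writeLE (addr r + 16) 8 p).writeLE (e.reg .rsp - 1488) 8
          1138095) sm.mem)
    (hunsm : ShadowUntouched sr.mem sm.mem)
    (w_df : sm.flags .df = false) (w_mx : sm.mxcsr &&& 8064 = 8064)
    (w_rip : s.rip = 1138105) (w_r13 : s.reg .r13 = Word.ofBV 0#32) (w_rsp : s.reg .rsp = e.reg .rsp - 1480)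
    (w_rbp : s.reg .rbp = addr g.f)
    (w_kept : RegsKept [.r13, .rsi, .r12, .rsp, .rdi, .rbp, .rax, .rcx, .rdx, .r8, .r9, .r10, .r11, .r16, .r17, .r18, .r19, .r20,
        .r21, .r22, .r23, .r24, .r25, .r26, .r27, .r28, .r29, .r30, .r31] v s)
    (w_mem : s.mem = sm.mem.writeLE (e.reg .rsp - 1424) 4 (Word.part Width.w32 (addr i)).toNat)
    (w_eq : Mem.EqOn 1048576 1154368 u₀.mem s.mem) (w_flags : s.flags = sm.flags) (w_mxcsr : s.mxcsr = sm.mxcsr) :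
    AtR7 u₀ g i s := by
  obtain ⟨hs, hs2⟩ := exit_R7_same Lay hLay u₀ g i v A6 A6c Ai A hb e r cbs cb E32 sr hge hr hcbs hcb n p sm s hn8 hE hfit hp
    harena1 hsame1 hsame2 w_mem
  obtain ⟨hloop, hr13, hr14, hrbx, hcur⟩ := hb
  obtain ⟨hframe, hhand, hmid, hile, hres, hzero⟩ := hloop
  have he : AtEntry (conv u₀) Vorbis.L.start_decoder.entry depth g.ret e := by
    rw [← hge]
    exact hframe.entry
  v_entry he
  simp only [depth] at he_room he_stack
  have hRA : g.RA = (e.reg .rsp).toNat := by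
    unfold Ghost.RA
    rw [hge]
  have hR : g.R = (e.reg .rsp).toNat - 1480 := by
    unfold Ghost.R steady
    rw [hRA]
  have v_r13 := hr13
  have v_r14 := hr14
  have v_rbx : v.reg .rbx = addr r := by
    rw [← hr]
    exact hrbx
  clear hrbx
  -- where the objects are
  have hfw := obj_where hframe hhand
  rw [hRA] at hfw
  have hout := hhand.objOut
  simp only [voff] at hout
  have hatext : 0x119d40 ≤ A.1.B := hhand.arenaText
  have hb := hmid.arena.bounds
  have hL : BlkLive (g.Blk A) (g.Live A) := hmid.env.live
  have hLa : BlkLive A.1.Blk (g.Live A) := hL.sub (fun B hB => runBlk_setup hB)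
  have hlt := hcur.lt
  have hR1 := hres.R1
  have hR2 : A.1.Blk ⟨stb_vorbis.residue_config v.mem g.f, Off.sizeof.Residue * (stb_vorbis.residue_count v.mem g.f).toNat⟩ :=
    hres.upTo.R2
  have hrw : 0x119d40 ≤ r ∧ r + 32 ≤ 0xC00000 ∧ (r + 32 ≤ 0x700000 ∨ 0x800000 ≤ r) ∧ A.1.B ≤ r ∧ r + 32 ≤ A.1.B + A.1.S := by
    have h1 := hmid.arena.block_off hR2
    have h2 := hmid.arena.block_range hR2
    have h3 := le_r8 (Off.sizeof.Residue * (stb_vorbis.residue_count v.mem g.f).toNat)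
    rw [← hr]
    simp only [resAt, stb_vorbis.residue_config_at, voff] at h1 h2 h3 ⊢
    omega
  have hcb_lt : cb < 256 := by
    rw [← hcb]
    simp only [vacc, voff]
    exact Mem.u8_lt _ _
  have hR7 : (cb : Int) < stb_vorbis.codebook_count v.mem g.f := by
    have := hcur.R7
    rw [hr, hcb] at this
    exact this
  have hcbok := (hmid.own.cb0 (by omega)).ok (hmid.own.nonnull (by omega))
  have hF1 := hcbok.F1
  have hF2 : A.1.Blk ⟨cbs, Off.sizeof.Codebook * (stb_vorbis.codebook_count v.mem g.f).toNat⟩ := by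
    rw [← hcbs]
    exact hcbok.F2.mono hmid.extc
  have hcw : 0x100000 ≤ cbs + 2120 * cb ∧ cbs + 2120 * cb + 2120 ≤ 0xC00000 ∧
      (cbs + 2120 * cb + 2120 ≤ 0x700000 ∨ 0x800000 ≤ cbs + 2120 * cb) ∧
      A.1.B ≤ cbs + 2120 * cb ∧ cbs + 2120 * cb + 2120 ≤ A.1.B + A.1.S := by
    have h1 := hmid.arena.block_off hF2
    have h2 := hmid.arena.block_range hF2
    have h3 := le_r8 (Off.sizeof.Codebook * (stb_vorbis.codebook_count v.mem g.f).toNat)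
    simp only [voff] at h1 h2 h3
    omega
  have hcr : cbs + 2120 * cb + 2120 ≤ r ∨ r + 32 ≤ cbs + 2120 * cb := by
    have hd := hmid.arena.old_disjoint_since hmid.extc hcbok.F2 (hres.R2.mono (hres.ext6c.trans hres.exti))
    rw [hcbs] at hd
    rw [← hr]
    simp only [vblock, resAt, stb_vorbis.residue_config_at, voff] at hd ⊢
    omega
  have ld1 : v.mem.readLE (addr g.f + 168) 8 = cbs := by
    rw [← hcbs]
    simp only [vfield, vacc, voff]
  have ld2 : v.mem.readLE (addr r + 13) 1 = cb := by
    rw [← hcb]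
    simp only [vfield, vacc, voff]
  have hfa : (addr g.f).toNat = g.f := toNat_addr _ (by omega)
  have hra : (addr r).toNat = r := toNat_addr _ (by omega)
  have hca : (UInt64.ofNat cbs).toNat = cbs := toNat_addr _ (by omega)
  have hza : (Word.ofBV (BitVec.setWidth 64 (BitVec.zeroExtend 32 (BitVec.ofNat 8 cb)))).toNat = cb := by
    rw [zx8 cb hcb_lt]
    exact toNat_addr _ (by omega)

  have hnewblk : (A.1.pushSetup n).Blk ⟨p, n⟩ := by
    rw [← hp]
    exact A.1.blk_pushSetup n
  have hpw : 0x119d40 ≤ p ∧ p + n ≤ 0xC00000 ∧ (p + n ≤ 0x700000 ∨ 0x800000 ≤ p) ∧ A.1.B + A.1.S + 32 = p ∧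
      p + n ≤ A.1.B + A.1.L := by
    have h1 := harena1.block_off hnewblk
    have h2 := arena_inside harena1 hnewblk
    simp only [varena] at h2
    simp only [] at h1 h2
    omega
  have hr' : stb_vorbis.residue_config_at v.mem g.f i = r := hr
  -- every window of the two footprints is one the invariant tolerates
  have hws : ∀ w, w ∈ [({ lo := (e.reg .rsp).toNat - 1568, hi := (e.reg .rsp).toNat - 1480 } : Span),
        { lo := (e.reg .rsp).toNat - 1424, hi := (e.reg .rsp).toNat - 1420 },
        { lo := g.f + 8, hi := g.f + 12 }, { lo := g.f + 128, hi := g.f + 132 },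
        { lo := r + 16, hi := r + 24 }, { lo := p, hi := p + n },
        { lo := 12582912 + p / 8, hi := 12582912 + (p + n + 7) / 8 }] → OffOld g A.1 r w := by
    intro w hw
    simp only [List.mem_cons, List.mem_nil_iff, or_false] at hw
    unfold OffOld
    rcases hw with rfl | rfl | rfl | rfl | rfl | rfl | rfl <;> simp only [] <;> omega
  -- the shadow layer and the arena layer at the exit
  have hsp4 : (e.reg .rsp - 1424).toNat = (e.reg .rsp).toNat - 1424 := by u_omega
  have hsp8 : (e.reg .rsp - 1488).toNat = (e.reg .rsp).toNat - 1488 := by u_omega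
  have hsp0 : (e.reg .rsp - 1480).toNat = (e.reg .rsp).toNat - 1480 := by u_omega
  have huns : ShadowUntouched sr.mem s.mem := by
    rw [w_mem]
    exact Mem.EqOn.step_writeLE _ _ _ hunsm (by omega) (by omega)
  have hshadow_s := hshadow1.untouched huns
  have harena_s : ArenaOK (A.1.pushSetup n) (A.1.newSetupObj n :: A.2) s.mem g.f := by
    apply harena1.frame (by simp only [voff]; omega)
    simp only [voff]
    apply hs2.eqOn
    intro w hw
    simp only [List.mem_cons, List.mem_nil_iff, or_false] at hw
    rcases hw with rfl | rfl | rfl | rfl <;> simp only [] <;> omega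
  -- `r->classdata` holds the new block
  have hr16 : (addr r + 16).toNat = r + 16 := by u_omega
  have h16 : s.mem.u64 (r + 16) = A.1.B + (A.1.S + 32) := by
    have a1 : (((sr.mem.writeLE (e.reg .rsp - 1488) 8 1137996).writeLE (addr r + 16) 8 p).writeLE (e.reg .rsp - 1488) 8
        1138095).readLE (addr r + 16) 8 = p := by
      rw [read_off_store _ _ _ _ _ _ (by omega) (by omega) (by omega), Mem.readLE_writeLE_same _ _ _ _ (by decide)]
      exact Nat.mod_eq_of_lt (by omega)
    have a2 : sm.mem.readLE (addr r + 16) 8 = p := by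
      rw [hsame2.readLE (addr r + 16) 8 (by omega) ?_]
      · exact a1
      · intro w hw
        simp only [List.mem_cons, List.mem_nil_iff, or_false] at hw
        rcases hw with rfl | rfl <;> simp only [] <;> omega
    show s.mem.readLE (addr (r + 16)) 8 = _
    rw [← addr_add_lit, w_mem, read_off_store _ _ _ _ _ _ (by omega) (by omega) (by omega), a2]
    omega
  -- E
  have hE' : n = 8 * Residue.E v.mem g.f r := by
    have ld3' : v.mem.u32 (cbs + cb * 2120 + 4) = E32 := by
      rw [← ld3, zx8 cb hcb_lt]
      show v.mem.readLE (addr (cbs + cb * 2120 + 4)) 4 = v.mem.readLE (addr cbs + addr cb * 2120 + 4) 4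
      simp only [vfield]
    have h3 := v.mem.i32_cases (cbs + 2120 * cb + 4)
    have e1 : cbs + 2120 * cb + 4 = cbs + cb * 2120 + 4 := by omega
    rw [e1, ld3'] at h3
    unfold Residue.E Residue.cbk
    rw [hcb]
    simp only [stb_vorbis.codebooks_at, hcbs, Codebook.entries, voff]
    rw [e1]
    omega
  -- the function's footprint since its entry
  have hext := hframe.ext
  have hsame_fp : Mem.SameExcept (footprint g) g.e.mem s.mem := by
    apply hframe.same.step_same hs
    intro w hw a h1 h2
    have eB := hext.B
    have eL := hext.L
    have ef : (g.e.reg .rdi).toNat = g.f := rfl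
    have ersp : (g.e.reg .rsp).toNat = g.RA := rfl
    simp only [footprint, writes, depth, vblock, voff, shadowSpan, ef, ersp, hRA, List.mem_cons, List.mem_nil_iff, or_false,
      exists_eq_or_imp, exists_eq_left] at hw ⊢
    rcases hw with rfl | rfl | rfl | rfl | rfl | rfl | rfl <;> simp only [] at h1 h2 <;> omega
  have hA' : Frame u₀ g pc_R7 (A.1.pushSetup n, A.1.newSetupObj n :: A.2) s := by
    have hrsp_s : s.reg .rsp = addr g.R := by
      have h1 := addr_sub_lit (e.reg .rsp).toNat 1480 (by omega)
      rw [addr_toNat] at h1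
      rw [hR, ← h1]
      exact w_rsp
    have hinv_s : abiInv s := by
      refine Vorbis.abiInv_of ?_ ?_
      · rw [w_flags]
        exact w_df
      · rw [w_mxcsr]
        exact w_mx
    have hrip_s : s.rip = pc_R7 := w_rip
    exact frame_after hframe hhand hmid hres hlt hr' hs hws hrip_s hrsp_s w_eq hinv_s hshadow_s hsame_fp
  have hres' := resTrans_grow (res_after hframe hhand hmid hres hlt hr' hs hws) (A.1.extends_pushSetup n)
  have hcur' := cur_after hframe hhand hmid hres hcur hr' hs hws h16 hE'
  refine ⟨A6, A6c, Ai, A.1, (A.1.pushSetup n, A.1.newSetupObj n :: A.2), ?_⟩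
  refine ⟨⟨hA', ?_, ?_, hres'.n_le, hres', ?_⟩, hres.exti, A.1.extends_pushSetup n, w_rbp, ?_, ?_, ?_, hcur'⟩
  · exact hhand.mono (A.1.extends_pushSetup n) (fun o ho => List.mem_cons_of_mem _ ho)
  · exact mid_after hframe hhand hmid hres hlt hr' hs hws harena_s hshadow_s
  · exact zero_after hframe hhand hmid hres hzero hlt hr' hs hws
  · -- rbx = r: never written; `residue_config` reads the same
    have he : ObjEq [(456, 464)] v.mem g.f s.mem g.f := by
      apply objEq_off (pos_of hframe hhand hmid.arena) ⟨hrw.2.2.2.1, by omega⟩ hs hws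
      intro w hw
      simp only [List.mem_cons, List.mem_nil_iff, or_false] at hw
      subst hw
      simp only []
      omega
    have econf : stb_vorbis.residue_config s.mem g.f = stb_vorbis.residue_config v.mem g.f := by
      simp only [vacc, voff]
      exact he.u64 456 (by decide)
    have eres' : resAt g s.mem i = r := by
      unfold resAt stb_vorbis.residue_config_at
      rw [econf]
      exact hr'
    rw [eres', w_kept.get .rbx rfl]
    exact v_rbx
  · -- r13d = j = 0
    rw [w_r13]
    rfl
  · -- dword [R + 38H] = i
    have h2 := addr_sub_lit (e.reg .rsp).toNat 1424 (by omega)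
    rw [addr_toNat] at h2
    have e1 : g.R + 0x38 = (e.reg .rsp).toNat - 1424 := by
      rw [hR]
      omega
    have hi64 : i ≤ 64 := by omega
    show s.mem.readLE (addr (g.R + 0x38)) 4 = i
    rw [e1, ← h2, w_mem, Mem.readLE_writeLE_same _ _ _ _ (by decide), Vorbis.toNat_part32, toNat_addr i (by omega)]
    omega

/-- **THE UNIT MODULO ITS ERROR EXIT**: `SegR6 Lay μ u₀` — the statement of `start_decoder.R6` — from the callees' contracts and ONE
remaining hypothesis, the exit assertion `AtERR` on the path where `setup_malloc` failed (`hE`: the hypothesis `hexitE` of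
`from_malloc_return`, for all ghosts; `exit_ERR` proves it, `seg_R6` puts the two together). The machine level (42 instructions,
7 check sites, 3 callee preconditions) and the success exit `AtR7` (`exit_R7`) are used here. -/
theorem r6_modulo_err_exit (Lay : Layout) (hLay : Lay.hi = 0x1000000) (μ : Microarch) (hμ : UserX.MicroOK μ) (u₀ : State)
    (hcode : HasCodeNat Lay u₀ Vorbis.L.start_decoder.entry Vorbis.Code.code_start_decoder.nat Vorbis.L.start_decoder.size)
    (hload8 : Asan.SmallCheck Lay μ Vorbis.WayInv (Vorbis.CodeOK u₀) [.rax, .rcx, .rdx] 8 Vorbis.L.__asan_load8_noabort.entry)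
    (hload1 : Asan.SmallCheck Lay μ Vorbis.WayInv (Vorbis.CodeOK u₀) [.rax, .rdx] 1 Vorbis.L.__asan_load1_noabort.entry)
    (hload4 : Asan.SmallCheck Lay μ Vorbis.WayInv (Vorbis.CodeOK u₀) [.rax, .rcx, .rdx] 4 Vorbis.L.__asan_load4_noabort.entry)
    (hsm : ∀ (others : List Obj) (frames : List (Nat × FrameLayout)) (A : Arena),
      Calls Lay μ Vorbis.WayInv (Vorbis.conv u₀) Vorbis.L.setup_malloc.entry (Vorbis.Spec.setup_malloc.spec others frames A))
    (hstore8 : Asan.SmallCheck Lay μ Vorbis.WayInv (Vorbis.CodeOK u₀) [.rax, .rcx, .rdx] 8 Vorbis.L.__asan_store8_noabort.entry)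
    (herr : ∀ (others : List Obj) (frames : List (Nat × FrameLayout)),
      Calls Lay μ Vorbis.WayInv (Vorbis.conv u₀) Vorbis.L.error.entry (Vorbis.Spec.error.spec others frames))
    (hmemset : ∀ (others : List Obj) (frames : List (Nat × FrameLayout)),
      Calls Lay μ Vorbis.WayInv (Vorbis.conv u₀) Vorbis.L.memset.entry (Vorbis.Spec.memset.spec others frames))
    (hE : ∀ (g : Ghost) (i : Nat) (v : State) (A6 A6c Ai : Arena) (A : Arena × List Obj)
      (_hb : BodyR6 u₀ g i A6 A6c Ai A v) (e : State) (r cbs cb E32 : Nat) (sr : State),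
      g.e = e → resAt g v.mem i = r → stb_vorbis.codebooks v.mem g.f = cbs → Residue.classbook v.mem r = cb →
      v.mem.readLE (UInt64.ofNat cbs +
        Word.ofBV (BitVec.setWidth 64 (BitVec.zeroExtend 32 (BitVec.ofNat 8 cb))) * 2120 + 4) 4 = E32 →
      ∀ (n : Nat) (se s : State),
      (Word.ofBV (BitVec.ofNat 32 E32 <<< 3)).toNat % 2 ^ 32 = n → ¬ A.1.Fits n →
      ArenaOK A.1 A.2 sr.mem g.f → ShadowUntouched v.mem sr.mem →
      Mem.SameExcept
        [{ lo := (e.reg .rsp - 1488).toNat - 80, hi := (e.reg .rsp - 1488).toNat },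
          { lo := g.f + 8, hi := g.f + 12 }]
        (v.mem.writeLE (e.reg .rsp - 1488) 8 1137984) sr.mem →
      Mem.SameExcept
        [{ lo := (e.reg .rsp - 1488).toNat - 48, hi := (e.reg .rsp - 1488).toNat },
          { lo := (addr g.f).toNat + 140, hi := (addr g.f).toNat + 140 + 4 }]
        (((sr.mem.writeLE (e.reg .rsp - 1488) 8 1137996).writeLE (addr r + 16) 8 0).writeLE (e.reg .rsp - 1488) 8
          1138018) se.mem →
      ShadowUntouched sr.mem se.mem →
      se.flags .df = false → se.mxcsr &&& 8064 = 8064 →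
      s.rip = 1129250 → s.reg .rsp = e.reg .rsp - 1480 → s.reg .rax = 0 →
      RegsKept [.rsi, .r12, .rsp, .rdi, .rbp, .rax, .rcx, .rdx, .r8, .r9, .r10, .r11, .r16, .r17, .r18, .r19, .r20, .r21,
        .r22, .r23, .r24, .r25, .r26, .r27, .r28, .r29, .r30, .r31] v s →
      s.mem = se.mem → Mem.EqOn 1048576 1154368 u₀.mem s.mem → s.flags = se.flags → s.mxcsr = se.mxcsr →
      AtERR u₀ g s) :
    Vorbis.Spec.StartDecoder.SegR6 Lay μ u₀ := by
  intro g i v hat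
  obtain ⟨A6, A6c, Ai, A, hb⟩ := hat
  apply to_malloc_return Lay hLay μ hμ u₀ hcode hload8 hload1 hload4 hsm g i v A6 A6c Ai A hb
  intro e r cbs cb E32 sb sr hge hr hcbs hcb ld3 hsi hsp hdi hsbm w_rip w_rsp w_kept w_r12 w_rbp w_same w_code w_inv w_post
  apply from_malloc_return Lay hLay μ hμ u₀ hcode hload8 hload1 hload4 hstore8 herr hmemset g i v A6 A6c Ai A hb e r cbs cb
    E32 sb sr hge hr hcbs hcb ld3 hsi hsp hdi hsbm w_rip w_rsp w_kept w_r12 w_rbp w_same w_code w_inv w_post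
  · intro n p sm s hn hn8 hE' hfit hp harena1 hshadow1 hsame1 hsame2 hunsm w_df w_mx zz w_rip w_r13 w_rsp w_rbp w_kept w_mem
      w_eq w_flags w_mxcsr
    exact exit_R7 Lay hLay u₀ g i v A6 A6c Ai A hb e r cbs cb E32 sr hge hr hcbs hcb ld3 n p sm s hn8 hE' hfit hp harena1
      hshadow1 hsame1 hsame2 hunsm w_df w_mx w_rip w_r13 w_rsp w_rbp w_kept w_mem w_eq w_flags w_mxcsr
  · exact hE g i v A6 A6c Ai A hb e r cbs cb E32 sr hge hr hcbs hcb ld3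


/-- `Mid` over a footprint of `OffOld` windows, same ghost arena (the failed allocation, `error`). -/
theorem mid_same {u₀ : State} {g : Ghost} {pc : Word} {v : State} {A6 A6c Ai : Arena} {A : Arena × List Obj} {mem' : Mem}
    {i r : Nat} {ws : List Span}
    (hf : Frame u₀ g pc A v) (hh : g.Hand A) (hmid : Mid g 6 6 7 A6 A v.mem) (hres : ResTrans A6 A6c Ai A.1 v.mem g.f i)
    (hlt : (i : Int) < stb_vorbis.residue_count v.mem g.f) (hr : stb_vorbis.residue_config_at v.mem g.f i = r)
    (hs : Mem.SameExcept ws v.mem mem') (hws : ∀ w, w ∈ ws → OffOld g A.1 r w)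
    (harena' : ArenaOK A.1 A.2 mem' g.f) (hsh : ShadowUntouched v.mem mem') :
    Mid g 6 6 7 A6 A mem' := by
  have hp := pos_of hf hh hmid.arena
  have hR1 := hres.R1
  have hR2 : A.1.Blk ⟨stb_vorbis.residue_config v.mem g.f, Off.sizeof.Residue * (stb_vorbis.residue_count v.mem g.f).toNat⟩ :=
    hres.upTo.R2
  have hcin := arena_inside hmid.arena hR2
  have hcrg := hmid.arena.block_range hR2
  have hcl := le_r8 (Off.sizeof.Residue * (stb_vorbis.residue_count v.mem g.f).toNat)
  have hrpos : A.1.B ≤ r ∧ r + 32 ≤ A.1.B + A.1.L ∧ stb_vorbis.residue_config v.mem g.f ≤ r ∧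
      r + 32 ≤ stb_vorbis.residue_config v.mem g.f + 32 * (stb_vorbis.residue_count v.mem g.f).toNat := by
    rw [← hr]
    have := hp.a_s
    simp only [stb_vorbis.residue_config_at, voff] at hcin hcrg hcl ⊢
    omega
  apply mid_alloc (A' := A) hmid
  · -- the windows of `*f`
    apply objEq_off hp ⟨hrpos.1, hrpos.2.1⟩ hs hws
    intro w hw
    have e1 : Mid.hi 6 = 320 := by decide
    have e2 : restFrom 7 = 464 := by decide
    simp only [Mid.winsAt, e1, e2, List.mem_cons, List.mem_nil_iff, or_false] at hw
    rcases hw with rfl | rfl | rfl | rfl | rfl | rfl <;> simp only [] <;> omega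
  · -- every block of the configuration arena is older than `residue_config`
    intro B hB
    have hBA : A.1.Blk B := hB.mono hmid.extc
    have hin := arena_inside hmid.arena hBA
    have hrg := hmid.arena.block_range hBA
    have hl := le_r8 B.size
    have hd := hmid.arena.old_disjoint_since hmid.extc hB (hres.R2.mono (hres.ext6c.trans hres.exti))
    simp only [vblock, voff] at hd
    apply kept_region hp hs hws B hin.1 (by omega)
    omega
  · -- the frame constants
    have hpR := hp.r_eq
    have hpa := hp.ra_hi
    apply SDFrameConsts.frame hmid.consts _ (by omega)
    apply eqOn_off hs hws
    intro w hw
    obtain ⟨p1, p2, p3, p4, p5, p6, p7, p8, p9, p10, p11⟩ := hp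
    unfold OffOld at hw
    omega
  · -- the slot of longest_floorlist
    intro _ _
    have hpR := hp.r_eq
    have hpa := hp.ra_hi
    have he : Mem.EqOn (g.R + 0x28) (g.R + 0x2c) v.mem mem' := by
      apply eqOn_off hs hws
      intro w hw
      obtain ⟨p1, p2, p3, p4, p5, p6, p7, p8, p9, p10, p11⟩ := hp
      unfold OffOld at hw
      omega
    simp only [Mem.i32_def]
    rw [he.u32 (g.R + 0x28) (by omega) (by omega) (by omega)]
  · exact Arena.Extends.refl _
  · exact hmid.env.eqOn hsh
  · exact harena'
  · exact hmid.noTemps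
  · -- `Bits`
    obtain ⟨p1, p2, p3, p4, p5, p6, p7, p8, p9, p10, p11⟩ := hp
    have hsf : Bits.SameFields v.mem mem' g.f := by
      apply Bits.SameFields.of_sameExcept hs
      all_goals
        intro w hw
        have := hws w hw
        unfold OffOld at this
        omega
    exact hmid.bits.frame_fields hsf

/-- `Frame` over a footprint of `OffOld` windows, same ghost arena. -/
theorem frame_same {u₀ : State} {g : Ghost} {pc pc' : Word} {v s : State} {A6 A6c Ai : Arena} {A : Arena × List Obj}
    {i r : Nat} {ws : List Span}
    (hf : Frame u₀ g pc A v) (hh : g.Hand A) (hmid : Mid g 6 6 7 A6 A v.mem) (hres : ResTrans A6 A6c Ai A.1 v.mem g.f i)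
    (hlt : (i : Int) < stb_vorbis.residue_count v.mem g.f) (hr : stb_vorbis.residue_config_at v.mem g.f i = r)
    (hs : Mem.SameExcept ws v.mem s.mem) (hws : ∀ w, w ∈ ws → OffOld g A.1 r w)
    (hrip : s.rip = pc') (hrsp : s.reg .rsp = addr g.R) (hcode : CodeOK u₀ s.mem) (hinv : abiInv s)
    (hsh : ShadowUntouched v.mem s.mem)
    (hsame : Mem.SameExcept (footprint g) g.e.mem s.mem) :
    Frame u₀ g pc' A s := by
  have hp := pos_of hf hh hmid.arena
  have hR1 := hres.R1
  have hR2 : A.1.Blk ⟨stb_vorbis.residue_config v.mem g.f, Off.sizeof.Residue * (stb_vorbis.residue_count v.mem g.f).toNat⟩ :=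
    hres.upTo.R2
  have hcin := arena_inside hmid.arena hR2
  have hreq : stb_vorbis.residue_config v.mem g.f + 32 * i = r := by
    rw [← hr]
    simp only [stb_vorbis.residue_config_at, voff]
  simp only [voff] at hcin
  have hrpos : A.1.B ≤ r ∧ r + 32 ≤ A.1.B + A.1.L := by
    have := hp.a_s
    omega
  obtain ⟨p1, p2, p3, p4, p5, p6, p7, p8, p9, p10, p11⟩ := hp
  -- the slots of the frame above the spill area
  have hlow : Mem.EqOn (g.R + 8) (g.R + 0x10) v.mem s.mem := by
    apply eqOn_off hs hws
    intro w hw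
    unfold OffOld at hw
    omega
  have hhigh : Mem.EqOn (g.R + 0x598) (g.R + 0x5d0) v.mem s.mem := by
    apply eqOn_off hs hws
    intro w hw
    unfold OffOld at hw
    omega
  -- the global `log2_4` lies off `*f` and off the arena
  have hlogf : g.f + 1808 ≤ 0x120640 ∨ 0x120650 ≤ g.f := by
    have hob : g.Blk A (objBlock g.f) := runBlk_extra List.mem_cons_self
    have hlg : g.Blk A ⟨0x120640, 16⟩ := by
      apply runBlk_extra
      simp only [Ghost.extra, fixedBlocks, globalBlocks, List.mem_cons, true_or, or_true]
    rcases hmid.env.ok.apart _ _ hob hlg with e | hd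
    · simp only [vblock, voff] at e
      have := congrArg Block.size e
      simp only [] at this
      omega
    · simp only [vblock, voff] at hd
      omega
  have hloga : 0x120640 + 16 ≤ A.1.B ∨ A.1.B + A.1.L ≤ 0x120640 := by
    have := hh.outside ⟨0x120640, 16⟩ (by simp only [fixedBlocks, globalBlocks, List.mem_cons, true_or, or_true])
    simp only [] at this
    exact this
  have hlog : Mem.EqOn 0x120640 0x120650 v.mem s.mem := by
    apply eqOn_off hs hws
    intro w hw
    unfold OffOld at hw
    omega
  refine ⟨hf.entry, hrip, hrsp, ?_, ?_, ?_, ?_, ?_, ?_, ?_, ?_, hcode, hinv, hf.shadow.untouched hsh, hf.offText, hf.ext, hf.callers, ?_, hsame⟩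
  · rw [hlow.u64 (g.R + 8) (by omega) (by omega) (by omega)]
    exact hf.shadowIdx
  · rw [hhigh.u64 (g.R + 0x598) (by omega) (by omega) (by omega)]
    exact hf.saved_rbx
  · rw [hhigh.u64 (g.R + 0x5a0) (by omega) (by omega) (by omega)]
    exact hf.saved_rbp
  · rw [hhigh.u64 (g.R + 0x5a8) (by omega) (by omega) (by omega)]
    exact hf.saved_r12
  · rw [hhigh.u64 (g.R + 0x5b0) (by omega) (by omega) (by omega)]
    exact hf.saved_r13
  · rw [hhigh.u64 (g.R + 0x5b8) (by omega) (by omega) (by omega)]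
    exact hf.saved_r14
  · rw [hhigh.u64 (g.R + 0x5c0) (by omega) (by omega) (by omega)]
    exact hf.saved_r15
  · rw [hhigh.u64 (g.R + 0x5c8) (by omega) (by omega) (by omega)]
    exact hf.saved_ra
  · intro k hk
    have h0 := hf.sh7 k hk
    have e : (Vorbis.Globals.log2_4.beg + k) = 0x120640 + k := rfl
    rw [e] at h0 ⊢
    have ea : (UInt64.ofNat (0x120640 + k)).toNat = 0x120640 + k := toNat_addr _ (by omega)
    rw [hlog.readLE (UInt64.ofNat (0x120640 + k)) 1 (by omega) (by omega) (by omega)]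
    exact h0



/-- **THE ERROR EXIT OF R6 (0x113b22)**: `AtERR` from `BodyR6` and what the walker knows of the state after `error` returned.
`hsame1` is the failure clause of `setup_malloc.spec` (only the callee's stack and `[f + 8, f + 12)` were written: no shadow byte),
so the whole path wrote four windows — the stack below `R`, `[f+8, f+12)`, `[f+140, f+144)`, `r->classdata` — and `Frame.same`
(nothing outside start_decoder's footprint changed since ITS entry) follows by `Mem.SameExcept.step_same`. The rest of `BodyERR`:
the other 18 fields of `Frame`, `Hand`, `Failed` (`Mid`, H2 / H3 from RES(i) with `classdata_i = 0` stored, H5). -/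
theorem exit_ERR (Lay : Layout) (hLay : Lay.hi = 0x1000000) (u₀ : State)
    (g : Ghost) (i : Nat) (v : State) (A6 A6c Ai : Arena) (A : Arena × List Obj) (hb : BodyR6 u₀ g i A6 A6c Ai A v)
    (e : State) (r cbs cb E32 : Nat) (sr : State)
    (hge : g.e = e) (hr : resAt g v.mem i = r) (hcbs : stb_vorbis.codebooks v.mem g.f = cbs)
    (hcb : Residue.classbook v.mem r = cb)
    (n : Nat) (se s : State)
    (harena1 : ArenaOK A.1 A.2 sr.mem g.f) (hunr : ShadowUntouched v.mem sr.mem)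
    (hsame1 : Mem.SameExcept
        [{ lo := (e.reg .rsp - 1488).toNat - 80, hi := (e.reg .rsp - 1488).toNat },
          { lo := g.f + 8, hi := g.f + 12 }]
        (v.mem.writeLE (e.reg .rsp - 1488) 8 1137984) sr.mem)
    (hsameE : Mem.SameExcept
        [{ lo := (e.reg .rsp - 1488).toNat - 48, hi := (e.reg .rsp - 1488).toNat },
          { lo := (addr g.f).toNat + 140, hi := (addr g.f).toNat + 140 + 4 }]
        (((sr.mem.writeLE (e.reg .rsp - 1488) 8 1137996).writeLE (addr r + 16) 8 0).writeLE (e.reg .rsp - 1488) 8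
          1138018) se.mem)
    (hunse : ShadowUntouched sr.mem se.mem)
    (w_df : se.flags .df = false) (w_mx : se.mxcsr &&& 8064 = 8064)
    (w_rip : s.rip = 1129250) (w_rsp : s.reg .rsp = e.reg .rsp - 1480) (w_rax : s.reg .rax = 0)
    (w_mem : s.mem = se.mem) (w_eq : Mem.EqOn 1048576 1154368 u₀.mem s.mem) (w_flags : s.flags = se.flags)
    (w_mxcsr : s.mxcsr = se.mxcsr) :
    AtERR u₀ g s := by
  obtain ⟨hloop, hr13, hr14, hrbx, hcur⟩ := hb
  obtain ⟨hframe, hhand, hmid, hile, hres, hzero⟩ := hloop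
  have he : AtEntry (conv u₀) Vorbis.L.start_decoder.entry depth g.ret e := by
    rw [← hge]
    exact hframe.entry
  v_entry he
  simp only [depth] at he_room he_stack
  have hRA : g.RA = (e.reg .rsp).toNat := by
    unfold Ghost.RA
    rw [hge]
  have hR : g.R = (e.reg .rsp).toNat - 1480 := by
    unfold Ghost.R steady
    rw [hRA]
  have v_r13 := hr13
  have v_r14 := hr14
  have v_rbx : v.reg .rbx = addr r := by
    rw [← hr]
    exact hrbx
  clear hrbx
  -- where the objects are
  have hfw := obj_where hframe hhand
  rw [hRA] at hfw
  have hout := hhand.objOut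
  simp only [voff] at hout
  have hatext : 0x119d40 ≤ A.1.B := hhand.arenaText
  have hb := hmid.arena.bounds
  have hL : BlkLive (g.Blk A) (g.Live A) := hmid.env.live
  have hLa : BlkLive A.1.Blk (g.Live A) := hL.sub (fun B hB => runBlk_setup hB)
  have hlt := hcur.lt
  have hR1 := hres.R1
  have hR2 : A.1.Blk ⟨stb_vorbis.residue_config v.mem g.f, Off.sizeof.Residue * (stb_vorbis.residue_count v.mem g.f).toNat⟩ :=
    hres.upTo.R2
  have hrw : 0x119d40 ≤ r ∧ r + 32 ≤ 0xC00000 ∧ (r + 32 ≤ 0x700000 ∨ 0x800000 ≤ r) ∧ A.1.B ≤ r ∧ r + 32 ≤ A.1.B + A.1.S := by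
    have h1 := hmid.arena.block_off hR2
    have h2 := hmid.arena.block_range hR2
    have h3 := le_r8 (Off.sizeof.Residue * (stb_vorbis.residue_count v.mem g.f).toNat)
    rw [← hr]
    simp only [resAt, stb_vorbis.residue_config_at, voff] at h1 h2 h3 ⊢
    omega
  have hcb_lt : cb < 256 := by
    rw [← hcb]
    simp only [vacc, voff]
    exact Mem.u8_lt _ _
  have hR7 : (cb : Int) < stb_vorbis.codebook_count v.mem g.f := by
    have := hcur.R7
    rw [hr, hcb] at this
    exact this
  have hcbok := (hmid.own.cb0 (by omega)).ok (hmid.own.nonnull (by omega))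
  have hF1 := hcbok.F1
  have hF2 : A.1.Blk ⟨cbs, Off.sizeof.Codebook * (stb_vorbis.codebook_count v.mem g.f).toNat⟩ := by
    rw [← hcbs]
    exact hcbok.F2.mono hmid.extc
  have hcw : 0x100000 ≤ cbs + 2120 * cb ∧ cbs + 2120 * cb + 2120 ≤ 0xC00000 ∧
      (cbs + 2120 * cb + 2120 ≤ 0x700000 ∨ 0x800000 ≤ cbs + 2120 * cb) ∧
      A.1.B ≤ cbs + 2120 * cb ∧ cbs + 2120 * cb + 2120 ≤ A.1.B + A.1.S := by
    have h1 := hmid.arena.block_off hF2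
    have h2 := hmid.arena.block_range hF2
    have h3 := le_r8 (Off.sizeof.Codebook * (stb_vorbis.codebook_count v.mem g.f).toNat)
    simp only [voff] at h1 h2 h3
    omega
  have hcr : cbs + 2120 * cb + 2120 ≤ r ∨ r + 32 ≤ cbs + 2120 * cb := by
    have hd := hmid.arena.old_disjoint_since hmid.extc hcbok.F2 (hres.R2.mono (hres.ext6c.trans hres.exti))
    rw [hcbs] at hd
    rw [← hr]
    simp only [vblock, resAt, stb_vorbis.residue_config_at, voff] at hd ⊢
    omega
  have ld1 : v.mem.readLE (addr g.f + 168) 8 = cbs := by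
    rw [← hcbs]
    simp only [vfield, vacc, voff]
  have ld2 : v.mem.readLE (addr r + 13) 1 = cb := by
    rw [← hcb]
    simp only [vfield, vacc, voff]
  have hfa : (addr g.f).toNat = g.f := toNat_addr _ (by omega)
  have hra : (addr r).toNat = r := toNat_addr _ (by omega)
  have hca : (UInt64.ofNat cbs).toNat = cbs := toNat_addr _ (by omega)
  have hza : (Word.ofBV (BitVec.setWidth 64 (BitVec.zeroExtend 32 (BitVec.ofNat 8 cb)))).toNat = cb := by
    rw [zx8 cb hcb_lt]
    exact toNat_addr _ (by omega)

  have hr' : stb_vorbis.residue_config_at v.mem g.f i = r := hr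
  have hsp8 : (e.reg .rsp - 1488).toNat = (e.reg .rsp).toNat - 1488 := by u_omega
  have hr16 : (addr r + 16).toNat = r + 16 := by u_omega
  rw [hsp8] at hsame1
  rw [hsp8, hfa] at hsameE
  have hs : Mem.SameExcept
      [{ lo := (e.reg .rsp).toNat - 1568, hi := (e.reg .rsp).toNat - 1480 },
        { lo := g.f + 8, hi := g.f + 12 }, { lo := g.f + 140, hi := g.f + 144 },
        { lo := r + 16, hi := r + 24 }] v.mem s.mem := by
    rw [w_mem]
    u_same
  have hs2 : Mem.SameExcept
      [{ lo := (e.reg .rsp).toNat - 1568, hi := (e.reg .rsp).toNat - 1480 },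
        { lo := g.f + 140, hi := g.f + 144 }, { lo := r + 16, hi := r + 24 }] sr.mem s.mem := by
    rw [w_mem]
    u_same
  have hws : ∀ w, w ∈ [({ lo := (e.reg .rsp).toNat - 1568, hi := (e.reg .rsp).toNat - 1480 } : Span),
        { lo := g.f + 8, hi := g.f + 12 }, { lo := g.f + 140, hi := g.f + 144 },
        { lo := r + 16, hi := r + 24 }] →
      OffOld g A.1 r w := by
    intro w hw
    simp only [List.mem_cons, List.mem_nil_iff, or_false] at hw
    unfold OffOld
    rcases hw with rfl | rfl | rfl | rfl <;> simp only [] <;> omega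
  have hsh : ShadowUntouched v.mem s.mem := by
    rw [w_mem]
    exact Mem.EqOn.trans hunr hunse
  have harena_s : ArenaOK A.1 A.2 s.mem g.f := by
    apply harena1.frame (by simp only [voff]; omega)
    simp only [voff]
    apply hs2.eqOn
    intro w hw
    simp only [List.mem_cons, List.mem_nil_iff, or_false] at hw
    rcases hw with rfl | rfl | rfl <;> simp only [] <;> omega
  have hmid' := mid_same hframe hhand hmid hres hlt hr' hs hws harena_s hsh
  -- `r->classdata` holds NULL
  have h16 : s.mem.u64 (r + 16) = 0 := by
    have a1 : (((sr.mem.writeLE (e.reg .rsp - 1488) 8 1137996).writeLE (addr r + 16) 8 0).writeLE (e.reg .rsp - 1488) 8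
        1138018).readLE (addr r + 16) 8 = 0 := by
      rw [read_off_store _ _ _ _ _ _ (by omega) (by omega) (by omega), Mem.readLE_writeLE_same _ _ _ _ (by decide)]
    show s.mem.readLE (addr (r + 16)) 8 = _
    rw [← addr_add_lit, w_mem, hsameE.readLE (addr r + 16) 8 (by omega) ?_]
    · exact a1
    · intro w hw
      simp only [List.mem_cons, List.mem_nil_iff, or_false] at hw
      rcases hw with rfl | rfl <;> simp only [] <;> omega
  have hres' := res_after hframe hhand hmid hres hlt hr' hs hws
  have hzero' := zero_after hframe hhand hmid hres hzero hlt hr' hs hws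
  have hrip_s : s.rip = pc_ERR := w_rip
  have hrsp_s : s.reg .rsp = addr g.R := by
    have h1 := addr_sub_lit (e.reg .rsp).toNat 1480 (by omega)
    rw [addr_toNat] at h1
    rw [hR, ← h1]
    exact w_rsp
  have hinv_s : abiInv s := by
    refine Vorbis.abiInv_of ?_ ?_
    · rw [w_flags]
      exact w_df
    · rw [w_mxcsr]
      exact w_mx
  -- the function's footprint since its entry: the four windows lie in the own frame, in `*f`, in the arena's buffer
  have hext := hframe.ext
  have hsame_fp : Mem.SameExcept (footprint g) g.e.mem s.mem := by
    apply hframe.same.step_same hs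
    intro w hw a h1 h2
    have eB := hext.B
    have eL := hext.L
    have ef : (g.e.reg .rdi).toNat = g.f := rfl
    have ersp : (g.e.reg .rsp).toNat = g.RA := rfl
    simp only [footprint, writes, depth, vblock, voff, shadowSpan, ef, ersp, hRA, List.mem_cons, List.mem_nil_iff, or_false,
      exists_eq_or_imp, exists_eq_left] at hw ⊢
    rcases hw with rfl | rfl | rfl | rfl <;> simp only [] at h1 h2 <;> omega
  have hF := frame_same hframe hhand hmid hres hlt hr' hs hws hrip_s hrsp_s w_eq hinv_s hsh hsame_fp
  refine ⟨A, hF, hhand, Or.inl ⟨?_, ?_⟩⟩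
  · rw [w_rax]
    rfl
  · have hd : ResidueDeinitOK A.1.Blk s.mem g.f := by
      apply hres'.upTo.deinit hzero' (hmid'.own.nonnull (by omega))
      intro _
      left
      have econf : stb_vorbis.residue_config_at s.mem g.f i = r := by
        have := hres'.R2
        have he : ObjEq [(456, 464)] v.mem g.f s.mem g.f := by
          apply objEq_off (pos_of hframe hhand hmid.arena) ⟨hrw.2.2.2.1, by omega⟩ hs hws
          intro w hw
          simp only [List.mem_cons, List.mem_nil_iff, or_false] at hw
          subst hw
          simp only []
          omega
        have ec : stb_vorbis.residue_config s.mem g.f = stb_vorbis.residue_config v.mem g.f := by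
          simp only [vacc, voff]
          exact he.u64 456 (by decide)
        unfold stb_vorbis.residue_config_at
        rw [ec]
        exact hr'
      rw [econf]
      simp only [Residue.classdata, Mem.ptr_eq, voff]
      exact h16
    have h2 : H2 (g.Blk A) s.mem g.f := H2.mono (ResidueDeinitOK.h2 hd hres'.R1.2) (fun _ hB => runBlk_setup hB)
    have h3 : H3 (g.Blk A) s.mem g.f := H3.mono (ResidueDeinitOK.h3 hd) (fun _ hB => runBlk_setup hB)
    exact hmid'.failed (by omega) h2 h3 (hmid'.h5_null (by omega) _)


/-- **THE UNIT**: `SegR6 Lay μ u₀` — the statement of `start_decoder.R6` — from the callees' contracts: `to_malloc_return`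
(0x115cf9 … 0x115d40), `from_malloc_return` (0x115d40 … both exits), `exit_R7` (the assertion `AtR7` at 0x115db9) and `exit_ERR`
(the assertion `AtERR` at 0x113b22, with `Frame.same` from the failure clause of `setup_malloc.spec`). -/
theorem seg_R6 (Lay : Layout) (hLay : Lay.hi = 0x1000000) (μ : Microarch) (hμ : UserX.MicroOK μ) (u₀ : State)
    (hcode : HasCodeNat Lay u₀ Vorbis.L.start_decoder.entry Vorbis.Code.code_start_decoder.nat Vorbis.L.start_decoder.size)
    (hload8 : Asan.SmallCheck Lay μ Vorbis.WayInv (Vorbis.CodeOK u₀) [.rax, .rcx, .rdx] 8 Vorbis.L.__asan_load8_noabort.entry)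
    (hload1 : Asan.SmallCheck Lay μ Vorbis.WayInv (Vorbis.CodeOK u₀) [.rax, .rdx] 1 Vorbis.L.__asan_load1_noabort.entry)
    (hload4 : Asan.SmallCheck Lay μ Vorbis.WayInv (Vorbis.CodeOK u₀) [.rax, .rcx, .rdx] 4 Vorbis.L.__asan_load4_noabort.entry)
    (hsm : ∀ (others : List Obj) (frames : List (Nat × FrameLayout)) (A : Arena),
      Calls Lay μ Vorbis.WayInv (Vorbis.conv u₀) Vorbis.L.setup_malloc.entry (Vorbis.Spec.setup_malloc.spec others frames A))
    (hstore8 : Asan.SmallCheck Lay μ Vorbis.WayInv (Vorbis.CodeOK u₀) [.rax, .rcx, .rdx] 8 Vorbis.L.__asan_store8_noabort.entry)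
    (herr : ∀ (others : List Obj) (frames : List (Nat × FrameLayout)),
      Calls Lay μ Vorbis.WayInv (Vorbis.conv u₀) Vorbis.L.error.entry (Vorbis.Spec.error.spec others frames))
    (hmemset : ∀ (others : List Obj) (frames : List (Nat × FrameLayout)),
      Calls Lay μ Vorbis.WayInv (Vorbis.conv u₀) Vorbis.L.memset.entry (Vorbis.Spec.memset.spec others frames)) :
    Vorbis.Spec.StartDecoder.SegR6 Lay μ u₀ := by
  apply r6_modulo_err_exit Lay hLay μ hμ u₀ hcode hload8 hload1 hload4 hsm hstore8 herr hmemset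
  intro g i v A6 A6c Ai A hb e r cbs cb E32 sr hge hr hcbs hcb ld3 n se s hn hfit harena1 hunr hsame1 hsameE hunse w_df w_mx
    w_rip w_rsp w_rax w_kept w_mem w_eq w_flags w_mxcsr
  exact exit_ERR Lay hLay u₀ g i v A6 A6c Ai A hb e r cbs cb E32 sr hge hr hcbs hcb n se s harena1 hunr hsame1 hsameE hunse
    w_df w_mx w_rip w_rsp w_rax w_mem w_eq w_flags w_mxcsr

end Vorbis.Spec.start_decoder_R6
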